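-- pv_equiv track=rewrite | github.com/bugoverdose/examples | algorithms/programmers/dfsbfs/puzzlepieces/solution.py | create_squares
-- ===== SOURCE A (Python) =====
-- dy = [1, -1, 0, 0]
--
-- dx = [0, 0, 1, -1]
--
-- def create_squares(table, check_filled):
--     N = len(table)
--     M = len(table[0])
--     pieces = []
--     visited = [[False for _ in range(M)] for _ in range(N)]
--     for i in range(N):
--         for j in range(M):
--             if visited[i][j]: continue
--             visited[i][j] = True
--             if check_filled ^ table[i][j]: continue
--             base_pieces = [] # ex. 5번 조각 = [(0,0), (1,0)]
--             stack = [(i, j)]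
--             while stack:
--                 cur_i, cur_j = stack.pop()
--                 base_pieces.append((cur_i - i, cur_j - j))
--                 for d in range(4):
--                     next_i = cur_i + dy[d]
--                     next_j = cur_j + dx[d]
--                     if next_i < 0 or next_i >= N: continue
--                     if next_j < 0 or next_j >= M: continue
--                     if visited[next_i][next_j]: continue
--                     visited[next_i][next_j] = True
--                     if check_filled ^ table[next_i][next_j]: continue
--                     stack.append((next_i, next_j))
--             pieces.append(base_pieces)
--     piece_squares = []
--     for p in pieces:
--         piece_squares.append((len(p), to_squares(p)))
--     return piece_squares
--
-- def to_squares(pieces):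
--     min_y, max_y = 99, 0
--     min_x, max_x = 99, 0
--     for p in pieces:
--         min_y = min(min_y, p[0])
--         max_y = max(max_y, p[0])
--         min_x = min(min_x, p[1])
--         max_x = max(max_x, p[1])
--     max_y -= min_y
--     max_x -= min_x
--     square = [[0 for _ in range(max_x+1)] for _ in range(max_y+1)]
--     for p in pieces:
--         square[p[0] - min_y][p[1] - min_x] = 1
--     return square
-- ===== SOURCE B (Python) =====
-- def create_squares(table, check_filled):
--     N = len(table)
--     M = len(table[0])
--     target = 1 if check_filled else 0
--
--     # phase 1: give every matching cell its row-major index as initial label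
--     label = {}
--     for i in range(N):
--         for j in range(M):
--             if table[i][j] == target:
--                 label[(i, j)] = i * M + j
--
--     # phase 2: min-label relaxation until stable: every cell's label converges
--     # to the smallest row-major index in its connected component
--     while True:
--         changed = False
--         for (i, j) in label:
--             v = label[(i, j)]
--             for nb in ((i - 1, j), (i + 1, j), (i, j - 1), (i, j + 1)):
--                 w = label.get(nb, v)
--                 if w < v:
--                     v = w
--             if v < label[(i, j)]:
--                 label[(i, j)] = v
--                 changed = True
--         if not changed:
--             break
--
--     # phase 3: group the cells of each component, keyed by its label
--     groups = {}
--     for i in range(N):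
--         for j in range(M):
--             if (i, j) in label:
--                 groups.setdefault(label[(i, j)], []).append((i, j))
--
--     # phase 4: one (size, mask) piece per component, in ascending label order
--     result = []
--     for lab in sorted(groups):
--         cells = groups[lab]
--         min_y = min(a for a, _ in cells)
--         max_y = max(a for a, _ in cells)
--         min_x = min(b for _, b in cells)
--         max_x = max(b for _, b in cells)
--         cs = set(cells)
--         square = [[1 if (y, x) in cs else 0 for x in range(min_x, max_x + 1)]
--                   for y in range(min_y, max_y + 1)]
--         result.append((len(cells), square))
--     return result
-- ===== Notes on version B (the rewrite author's own statement) =====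
-- stated objective: alternative
-- what changed: A's per-component stack DFS over a mutable visited matrix (pieces as start-relative offsets, mask painted by in-place writes) is replaced by whole-grid min-label relaxation: each matching cell starts with its row-major index, labels are relaxed over neighbours until stable, cells are then grouped by their converged label and each group rendered as a membership mask.
-- outside the precondition, e.g. on create_squares([], True): A raises IndexError, B raises IndexError; on create_squares([[1, 1], [1]], True): A raises IndexError, B raises IndexError
import Mathlib
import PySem

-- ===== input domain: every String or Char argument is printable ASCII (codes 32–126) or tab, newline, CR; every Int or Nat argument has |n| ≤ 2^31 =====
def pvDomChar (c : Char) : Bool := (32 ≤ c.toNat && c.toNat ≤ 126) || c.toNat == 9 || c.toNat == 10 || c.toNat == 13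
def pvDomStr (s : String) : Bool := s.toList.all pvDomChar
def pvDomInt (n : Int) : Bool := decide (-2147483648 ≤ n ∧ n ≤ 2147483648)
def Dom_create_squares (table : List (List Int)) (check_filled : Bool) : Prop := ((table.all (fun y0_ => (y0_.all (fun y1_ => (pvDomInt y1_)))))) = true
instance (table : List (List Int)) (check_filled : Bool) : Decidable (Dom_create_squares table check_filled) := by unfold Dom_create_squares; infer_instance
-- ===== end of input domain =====

-- B replaces A's per-component stack DFS over a visited matrix by whole-grid min-label
-- relaxation (each matching cell converges to the least row-major index of its component),
-- followed by grouping by label (objective: alternative — a different algorithm).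

-- ===== PORT A =====
-- `table[i][j]`: every access in A happens at indices proven in range under Pre_, so a total getD is exact.
def pvCell (table : List (List Int)) (i j : Nat) : Int := (table.getD i []).getD j 0

-- `check_filled ^ table[i][j]` (bool XOR int) is truthy exactly when table[i][j] ≠ int(check_filled); exact.
def pvTarget (cf : Bool) : Int := if cf then 1 else 0

def pvDy : List Int := [1, -1, 0, 0]
def pvDx : List Int := [0, 0, 1, -1]

-- the body of A's `for d in range(4)` loop: state = (visited, stack).
-- The visited matrix is modeled as the set of cells that hold True (exact: only membership is read);
-- the stack is kept top-first (push = cons, pop = head), mirroring Python's append/pop at the end.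
def pvDirStep (table : List (List Int)) (cf : Bool) (N M ci cj : Nat)
    (VS : List (Nat × Nat) × List (Nat × Nat)) (d : Nat) : List (Nat × Nat) × List (Nat × Nat) :=
  if (ci : Int) + pvDy.getD d 0 < 0 ∨ (N : Int) ≤ (ci : Int) + pvDy.getD d 0 then VS
  else if (cj : Int) + pvDx.getD d 0 < 0 ∨ (M : Int) ≤ (cj : Int) + pvDx.getD d 0 then VS
  else if (((ci : Int) + pvDy.getD d 0).toNat, ((cj : Int) + pvDx.getD d 0).toNat) ∈ VS.1 then VS
  else if pvCell table ((ci : Int) + pvDy.getD d 0).toNat ((cj : Int) + pvDx.getD d 0).toNat ≠ pvTarget cf then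
    ((((ci : Int) + pvDy.getD d 0).toNat, ((cj : Int) + pvDx.getD d 0).toNat) :: VS.1, VS.2)
  else
    ((((ci : Int) + pvDy.getD d 0).toNat, ((cj : Int) + pvDx.getD d 0).toNat) :: VS.1,
     (((ci : Int) + pvDy.getD d 0).toNat, ((cj : Int) + pvDx.getD d 0).toNat) :: VS.2)

-- A's `while stack:` loop; fuel N*M+1 provably suffices (each iteration pops one cell and every
-- push marks a fresh cell visited).
def pvDfs (table : List (List Int)) (cf : Bool) (N M si sj : Nat) :
    Nat → List (Nat × Nat) → List (Nat × Nat) → List (Int × Int) →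
      List (Nat × Nat) × List (Int × Int)
  | 0, V, _, acc => (V, acc)
  | Nat.succ f, V, S, acc =>
    match S with
    | [] => (V, acc)
    | (ci, cj) :: S' =>
      let acc' := acc ++ [((ci : Int) - (si : Int), (cj : Int) - (sj : Int))]
      let VS := (List.range 4).foldl (pvDirStep table cf N M ci cj) (V, S')
      pvDfs table cf N M si sj f VS.1 VS.2 acc'

-- `square[r][c] = 1`
def pvSet2d (sq : List (List Int)) (r c : Nat) : List (List Int) :=
  sq.modify r (fun row => row.set c 1)

def to_squares (p : List (Int × Int)) : List (List Int) :=
  let mm := p.foldl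
    (fun (st : Int × Int × Int × Int) q =>
      (min st.1 q.1, max st.2.1 q.1, min st.2.2.1 q.2, max st.2.2.2 q.2))
    (99, 0, 99, 0)
  let min_y := mm.1
  let max_y := mm.2.1 - mm.1
  let min_x := mm.2.2.1
  let max_x := mm.2.2.2 - mm.2.2.1
  let square := List.replicate (max_y + 1).toNat (List.replicate (max_x + 1).toNat (0 : Int))
  p.foldl (fun sq q => pvSet2d sq (q.1 - min_y).toNat (q.2 - min_x).toNat) square

-- the body of A's scan over one cell (i, j): state = (visited, pieces)
def pvScanStepA (table : List (List Int)) (cf : Bool) (N M : Nat)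
    (st : List (Nat × Nat) × List (List (Int × Int))) (i j : Nat) :
    List (Nat × Nat) × List (List (Int × Int)) :=
  if (i, j) ∈ st.1 then st
  else
    let V := (i, j) :: st.1
    if pvCell table i j ≠ pvTarget cf then (V, st.2)
    else
      let r := pvDfs table cf N M i j (N * M + 1) V [(i, j)] []
      (r.1, st.2 ++ [r.2])

def create_squares (table : List (List Int)) (check_filled : Bool) : List (Int × List (List Int)) :=
  let N := table.length
  let M := (table.headD []).length
  let st := (List.range N).foldl
    (fun st i => (List.range M).foldl (fun st j => pvScanStepA table check_filled N M st i j) st)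
    ([], [])
  st.2.map (fun p => ((p.length : Int), to_squares p))

-- ===== PORT B =====  (transliteration of Source B: min-label relaxation, then grouping by label)
-- phase 1: `label[(i, j)] = i * M + j` for every matching cell, in row-major order
def pvInit (table : List (List Int)) (target : Int) (N M : Nat) : PySem.Dict (Int × Int) Int :=
  (List.range N).foldl (fun L i => (List.range M).foldl (fun L j =>
    if pvCell table i j == target
    then L.insert ((i : Int), (j : Int)) ((i : Int) * (M : Int) + (j : Int)) else L) L)
    PySem.Dict.empty

def pvNbs (k : Int × Int) : List (Int × Int) :=
  [(k.1 - 1, k.2), (k.1 + 1, k.2), (k.1, k.2 - 1), (k.1, k.2 + 1)]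

-- the body of Source B's relaxation pass for one key (i, j); state = (label, changed).
-- `label.get(nb, v)` is getD with the current v as default; `label[(i, j)] = v` overwrites in place.
def pvRelaxCell (st : PySem.Dict (Int × Int) Int × Bool) (k : Int × Int) :
    PySem.Dict (Int × Int) Int × Bool :=
  let v0 := st.1.getD k 0          -- label[(i, j)]: k is always a key of the dict
  let v := (pvNbs k).foldl (fun v nb => let w := st.1.getD nb v; if w < v then w else v) v0
  if v < v0 then (st.1.insert k v, true) else st

-- one `for (i, j) in label:` pass (the key list is fixed at pass start; only values change)
def pvPass (L : PySem.Dict (Int × Int) Int) : PySem.Dict (Int × Int) Int × Bool :=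
  L.keys.foldl pvRelaxCell (L, false)

-- Source B's `while True: … if not changed: break`; fuel (N*M)^2+1 provably suffices
-- (every changed pass strictly decreases the sum of the labels)
def pvRelax : Nat → PySem.Dict (Int × Int) Int → PySem.Dict (Int × Int) Int
  | 0, L => L
  | Nat.succ f, L => let r := pvPass L; if r.2 then pvRelax f r.1 else r.1

-- phase 3 body for one cell (i, j): groups.setdefault(label[(i, j)], []).append((i, j))
def pvGroupCell (L : PySem.Dict (Int × Int) Int) (G : PySem.Dict Int (List (Nat × Nat)))
    (i j : Nat) : PySem.Dict Int (List (Nat × Nat)) :=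
  if L.contains ((i : Int), (j : Int)) then
    G.modify (L.getD ((i : Int), (j : Int)) 0) [] (fun cells => cells ++ [(i, j)])
  else G

-- phase 4: one (size, mask) piece from one group's cell list
def pvPiece (cells : List (Nat × Nat)) : Int × List (List Int) :=
  let min_y := (PySem.List.min? (cells.map Prod.fst) (fun x => x)).getD 0  -- cells nonempty: default unreachable
  let max_y := (PySem.List.max? (cells.map Prod.fst) (fun x => x)).getD 0
  let min_x := (PySem.List.min? (cells.map Prod.snd) (fun x => x)).getD 0
  let max_x := (PySem.List.max? (cells.map Prod.snd) (fun x => x)).getD 0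
  let cs := PySem.Set.ofList cells
  -- `range(min_x, max_x+1)` over Nats, written as an offset List.range; exact (bounds are Nats)
  let square := (List.range (max_y + 1 - min_y)).map (fun dy => (List.range (max_x + 1 - min_x)).map
    (fun dx => if cs.contains (min_y + dy, min_x + dx) then (1 : Int) else 0))
  ((cells.length : Int), square)

def create_squares_alt (table : List (List Int)) (check_filled : Bool) :
    List (Int × List (List Int)) :=
  let N := table.length
  let M := (table.headD []).length
  let target : Int := if check_filled then 1 else 0
  let L := pvRelax (N * M * (N * M) + 1) (pvInit table target N M)
  let G := (List.range N).foldl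
    (fun G i => (List.range M).foldl (fun G j => pvGroupCell L G i j) G) PySem.Dict.empty
  (PySem.List.sorted G.keys (fun x => x) false).map (fun lab => pvPiece (G.getD lab []))

-- ===== PRECONDITION & SPEC =====
-- Pre_ excludes exactly the inputs where the Python A raises IndexError: the empty table
-- (table[0]) and ragged tables having a row shorter than the first row (table[i][j], j < M).
def Pre_create_squares (table : List (List Int)) (check_filled : Bool) : Prop :=
  table ≠ [] ∧ ∀ r ∈ table, (table.headD []).length ≤ r.length
instance (table : List (List Int)) (check_filled : Bool) :
    Decidable (Pre_create_squares table check_filled) := by unfold Pre_create_squares; infer_instance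

def pvWitness_create_squares : List (List Int) × Bool := ([[1, 0, 1], [1, 1, 0]], true)

def Spec_create_squares (table : List (List Int)) (check_filled : Bool) (out : List (Int × List (List Int))) : Prop := out = create_squares_alt table check_filled
instance (table : List (List Int)) (check_filled : Bool) (out : List (Int × List (List Int))) : Decidable (Spec_create_squares table check_filled out) := by unfold Spec_create_squares; infer_instance

-- ===== CLAIM (what is proved, stated in full; the proofs are below) =====
def Claim_equal_create_squares : Prop := ∀ (table : List (List Int)) (check_filled : Bool), Dom_create_squares table check_filled → Pre_create_squares table check_filled → Spec_create_squares table check_filled (create_squares table check_filled)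

-- ===== LEMMAS AND PROOFS =====
-- ===== spec-side notions =====
def pvGrid (N M : Nat) (c : Nat × Nat) : Prop := c.1 < N ∧ c.2 < M

def pvOk (t : List (List Int)) (tgt : Int) (N M : Nat) (c : Nat × Nat) : Prop :=
  c.1 < N ∧ c.2 < M ∧ pvCell t c.1 c.2 = tgt

def pvAdj (c d : Nat × Nat) : Prop :=
  (c.1 = d.1 ∧ (c.2 + 1 = d.2 ∨ d.2 + 1 = c.2)) ∨ (c.2 = d.2 ∧ (c.1 + 1 = d.1 ∨ d.1 + 1 = c.1))

def pvNbh (t : List (List Int)) (tgt : Int) (N M : Nat) (c d : Nat × Nat) : Prop :=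
  pvOk t tgt N M c ∧ pvOk t tgt N M d ∧ pvAdj c d

def pvRch (t : List (List Int)) (tgt : Int) (N M : Nat) (s c : Nat × Nat) : Prop :=
  pvOk t tgt N M s ∧ Relation.ReflTransGen (pvNbh t tgt N M) s c

lemma pvAdj_symm {c d : Nat × Nat} (h : pvAdj c d) : pvAdj d c := by
  rcases h with ⟨h1, h2⟩ | ⟨h1, h2⟩
  · exact Or.inl ⟨h1.symm, h2.symm⟩
  · exact Or.inr ⟨h1.symm, h2.symm⟩

lemma pvNbh_symm {t tgt N M} {c d : Nat × Nat} (h : pvNbh t tgt N M c d) : pvNbh t tgt N M d c :=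
  ⟨h.2.1, h.1, pvAdj_symm h.2.2⟩

lemma pvRch_ok {t tgt N M} {s c : Nat × Nat} (h : pvRch t tgt N M s c) : pvOk t tgt N M c := by
  rcases h with ⟨hs, hr⟩
  induction hr with
  | refl => exact hs
  | tail _ h2 _ => exact h2.2.1

lemma pvRch_refl {t tgt N M} {s : Nat × Nat} (h : pvOk t tgt N M s) : pvRch t tgt N M s s :=
  ⟨h, Relation.ReflTransGen.refl⟩

lemma pvRch_step {t tgt N M} {s c d : Nat × Nat} (h : pvRch t tgt N M s c)
    (h2 : pvNbh t tgt N M c d) : pvRch t tgt N M s d :=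
  ⟨h.1, Relation.ReflTransGen.tail h.2 h2⟩

lemma pvRch_symm {t tgt N M} {s c : Nat × Nat} (h : pvRch t tgt N M s c) : pvRch t tgt N M c s :=
  ⟨pvRch_ok h, Relation.ReflTransGen.symmetric (fun _ _ hh => pvNbh_symm hh) h.2⟩

lemma pvRch_trans {t tgt N M} {s c d : Nat × Nat} (h : pvRch t tgt N M s c)
    (h2 : pvRch t tgt N M c d) : pvRch t tgt N M s d :=
  ⟨h.1, Relation.ReflTransGen.trans h.2 h2.2⟩

-- a set containing s, contained in Rch s, and closed under neighbours IS Rch s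
lemma pvClosedIff {t tgt N M} {s : Nat × Nat} {C : List (Nat × Nat)}
    (hs : s ∈ C) (hsub : ∀ c ∈ C, pvRch t tgt N M s c)
    (hcl : ∀ c ∈ C, ∀ d, pvNbh t tgt N M c d → d ∈ C) :
    ∀ c, c ∈ C ↔ pvRch t tgt N M s c := by
  intro c
  refine ⟨hsub c, fun h => ?_⟩
  rcases h with ⟨hso, hr⟩
  induction hr with
  | refl => exact hs
  | tail h1 h2 ih => exact hcl _ ih _ h2

-- ===== neighbour enumeration bridges (A's dy/dx table) =====
def pvNbr? (N M : Nat) (c : Nat × Nat) (k : Nat) : Option (Nat × Nat) :=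
  if (c.1 : Int) + pvDy.getD k 0 < 0 ∨ (N : Int) ≤ (c.1 : Int) + pvDy.getD k 0 then none
  else if (c.2 : Int) + pvDx.getD k 0 < 0 ∨ (M : Int) ≤ (c.2 : Int) + pvDx.getD k 0 then none
  else some (((c.1 : Int) + pvDy.getD k 0).toNat, ((c.2 : Int) + pvDx.getD k 0).toNat)

lemma pvNbr?_grid {N M : Nat} {c d : Nat × Nat} {k : Nat} (h : pvNbr? N M c k = some d) :
    pvGrid N M d := by
  unfold pvNbr? at h
  split at h
  · exact absurd h (by simp)
  · split at h
    · exact absurd h (by simp)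
    · rename_i h1 h2
      simp only [Option.some.injEq] at h
      subst h
      simp only [not_or, not_lt, not_le] at h1 h2
      unfold pvGrid; exact ⟨by omega, by omega⟩

lemma pvNbr?_adj {N M : Nat} {c d : Nat × Nat} {k : Nat} (hk : k < 4)
    (h : pvNbr? N M c k = some d) : pvAdj c d := by
  unfold pvNbr? at h
  split at h
  · exact absurd h (by simp)
  · split at h
    · exact absurd h (by simp)
    · rename_i h1 h2
      simp only [Option.some.injEq] at h
      subst h
      simp only [not_or, not_lt, not_le] at h1 h2
      interval_cases k <;>
        simp only [pvDy, pvDx, List.getD_cons_zero, List.getD_cons_succ, pvAdj] at * <;> omega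

lemma pvAdj_nbr? {N M : Nat} {c d : Nat × Nat} (hd : pvGrid N M d) (h : pvAdj c d) :
    ∃ k, k < 4 ∧ pvNbr? N M c k = some d := by
  obtain ⟨d1, d2⟩ := d
  obtain ⟨c1, c2⟩ := c
  simp only [pvGrid, pvAdj] at hd h
  rcases h with ⟨h1, h2 | h2⟩ | ⟨h1, h2 | h2⟩
  · refine ⟨2, by omega, ?_⟩
    unfold pvNbr?
    simp only [pvDy, pvDx, List.getD_cons_zero, List.getD_cons_succ]
    rw [if_neg (by omega), if_neg (by omega)]
    simp only [Option.some.injEq, Prod.mk.injEq]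
    omega
  · refine ⟨3, by omega, ?_⟩
    unfold pvNbr?
    simp only [pvDy, pvDx, List.getD_cons_zero, List.getD_cons_succ]
    rw [if_neg (by omega), if_neg (by omega)]
    simp only [Option.some.injEq, Prod.mk.injEq]
    omega
  · refine ⟨0, by omega, ?_⟩
    unfold pvNbr?
    simp only [pvDy, pvDx, List.getD_cons_zero, List.getD_cons_succ]
    rw [if_neg (by omega), if_neg (by omega)]
    simp only [Option.some.injEq, Prod.mk.injEq]
    omega
  · refine ⟨1, by omega, ?_⟩
    unfold pvNbr?
    simp only [pvDy, pvDx, List.getD_cons_zero, List.getD_cons_succ]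
    rw [if_neg (by omega), if_neg (by omega)]
    simp only [Option.some.injEq, Prod.mk.injEq]
    omega

-- one direction of A's neighbour loop, case-analysed
lemma pvDirStep_cases (t : List (List Int)) (cf : Bool) (N M ci cj : Nat)
    (V S : List (Nat × Nat)) (d : Nat) :
    (pvDirStep t cf N M ci cj (V, S) d = (V, S) ∧
      ∀ x, pvNbr? N M (ci, cj) d = some x → x ∈ V) ∨
    (∃ x, pvNbr? N M (ci, cj) d = some x ∧ x ∉ V ∧
      ((pvCell t x.1 x.2 ≠ pvTarget cf ∧ pvDirStep t cf N M ci cj (V, S) d = (x :: V, S)) ∨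
       (pvCell t x.1 x.2 = pvTarget cf ∧ pvDirStep t cf N M ci cj (V, S) d = (x :: V, x :: S)))) := by
  unfold pvDirStep pvNbr?
  split
  · left; exact ⟨rfl, by intro x hx; simp at hx⟩
  · split
    · left; exact ⟨rfl, by intro x hx; simp at hx⟩
    · split
      · rename_i hv
        left
        exact ⟨rfl, by intro x hx; simp only [Option.some.injEq] at hx; subst hx; exact hv⟩
      · rename_i hv
        right
        refine ⟨_, rfl, hv, ?_⟩
        split
        · rename_i hc; exact Or.inl ⟨hc, rfl⟩
        · rename_i hc; rw [not_not] at hc; exact Or.inr ⟨hc, rfl⟩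

-- folding A's neighbour step over a list of directions
lemma pvFoldDirs (t : List (List Int)) (cf : Bool) (N M ci cj : Nat) (ds : List Nat) :
    ∀ V S : List (Nat × Nat), V.Nodup → S.Nodup → (∀ x ∈ S, x ∈ V) →
    ∃ V' S', ds.foldl (pvDirStep t cf N M ci cj) (V, S) = (V', S') ∧
      (∀ x ∈ V, x ∈ V') ∧ (∀ x ∈ S, x ∈ S') ∧
      V'.Nodup ∧ S'.Nodup ∧ (∀ x ∈ S', x ∈ V') ∧
      (∀ x ∈ V', x ∈ V ∨ ∃ d ∈ ds, pvNbr? N M (ci, cj) d = some x) ∧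
      (∀ x ∈ S', x ∈ S ∨ (x ∉ V ∧ pvCell t x.1 x.2 = pvTarget cf ∧
          ∃ d ∈ ds, pvNbr? N M (ci, cj) d = some x)) ∧
      (∀ x ∈ V', x ∉ V → pvCell t x.1 x.2 = pvTarget cf → x ∈ S') ∧
      (∀ d ∈ ds, ∀ x, pvNbr? N M (ci, cj) d = some x → x ∈ V') ∧
      S'.length + V.length ≤ V'.length + S.length := by
  induction ds with
  | nil =>
    intro V S hV hS hSV
    exact ⟨V, S, rfl, fun x h => h, fun x h => h, hV, hS, hSV,
      fun x h => Or.inl h, fun x h => Or.inl h, fun x h hn _ => absurd h hn,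
      by simp, by omega⟩
  | cons d ds ih =>
    intro V S hV hS hSV
    rcases pvDirStep_cases t cf N M ci cj V S d with ⟨heq, hcov⟩ | ⟨x, hx, hxV, hcase⟩
    · obtain ⟨V', S', hfold, c1, c2, c3, c4, c5, c6, c7, c8, c9, c10⟩ := ih V S hV hS hSV
      refine ⟨V', S', by simp only [List.foldl_cons, heq, hfold], c1, c2, c3, c4, c5,
        fun x h => (c6 x h).imp_right (fun ⟨d', hd', he⟩ => ⟨d', List.mem_cons_of_mem _ hd', he⟩),
        fun x h => (c7 x h).imp_right (fun ⟨ha, hb, d', hd', he⟩ => ⟨ha, hb, d', List.mem_cons_of_mem _ hd', he⟩),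
        c8, ?_, c10⟩
      intro d' hd' y hy
      rcases List.mem_cons.mp hd' with h | h
      · subst h; exact c1 y (hcov y hy)
      · exact c9 d' h y hy
    · rcases hcase with ⟨hne, heq⟩ | ⟨hok, heq⟩
      · obtain ⟨V', S', hfold, c1, c2, c3, c4, c5, c6, c7, c8, c9, c10⟩ :=
          ih (x :: V) S (List.nodup_cons.mpr ⟨hxV, hV⟩) hS
            (fun y hy => List.mem_cons_of_mem _ (hSV y hy))
        refine ⟨V', S', by simp only [List.foldl_cons, heq, hfold], ?_, c2, c3, c4, c5, ?_, ?_, ?_, ?_, ?_⟩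
        · exact fun y hy => c1 y (List.mem_cons_of_mem _ hy)
        · intro y hy
          rcases c6 y hy with h | ⟨d', hd', he⟩
          · rcases List.mem_cons.mp h with h | h
            · subst h; exact Or.inr ⟨d, List.mem_cons_self .., hx⟩
            · exact Or.inl h
          · exact Or.inr ⟨d', List.mem_cons_of_mem _ hd', he⟩
        · intro y hy
          rcases c7 y hy with h | ⟨ha, hb, d', hd', he⟩
          · exact Or.inl h
          · exact Or.inr ⟨fun hc => ha (List.mem_cons_of_mem _ hc), hb,
              d', List.mem_cons_of_mem _ hd', he⟩
        · intro y hy hyV hyok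
          by_cases hxy : y = x
          · subst hxy; exact absurd hyok hne
          · exact c8 y hy (by simp [hxy, hyV]) hyok
        · intro d' hd' y hy
          rcases List.mem_cons.mp hd' with h | h
          · subst h
            rw [hx] at hy
            obtain rfl : x = y := by injection hy
            exact c1 x (List.mem_cons_self ..)
          · exact c9 d' h y hy
        · simp only [List.length_cons] at c10; omega
      · obtain ⟨V', S', hfold, c1, c2, c3, c4, c5, c6, c7, c8, c9, c10⟩ :=
          ih (x :: V) (x :: S) (List.nodup_cons.mpr ⟨hxV, hV⟩)
            (List.nodup_cons.mpr ⟨fun hc => hxV (hSV x hc), hS⟩)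
            (by
              intro y hy
              rcases List.mem_cons.mp hy with h | h
              · subst h; exact List.mem_cons_self ..
              · exact List.mem_cons_of_mem _ (hSV y h))
        refine ⟨V', S', by simp only [List.foldl_cons, heq, hfold], ?_, ?_, c3, c4, c5, ?_, ?_, ?_, ?_, ?_⟩
        · exact fun y hy => c1 y (List.mem_cons_of_mem _ hy)
        · exact fun y hy => c2 y (List.mem_cons_of_mem _ hy)
        · intro y hy
          rcases c6 y hy with h | ⟨d', hd', he⟩
          · rcases List.mem_cons.mp h with h | h
            · subst h; exact Or.inr ⟨d, List.mem_cons_self .., hx⟩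
            · exact Or.inl h
          · exact Or.inr ⟨d', List.mem_cons_of_mem _ hd', he⟩
        · intro y hy
          rcases c7 y hy with h | ⟨ha, hb, d', hd', he⟩
          · rcases List.mem_cons.mp h with h | h
            · subst h; exact Or.inr ⟨hxV, hok, d, List.mem_cons_self .., hx⟩
            · exact Or.inl h
          · exact Or.inr ⟨fun hc => ha (List.mem_cons_of_mem _ hc), hb,
              d', List.mem_cons_of_mem _ hd', he⟩
        · intro y hy hyV hyok
          by_cases hxy : y = x
          · subst hxy; exact c2 y (List.mem_cons_self ..)
          · exact c8 y hy (by simp [hxy, hyV]) hyok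
        · intro d' hd' y hy
          rcases List.mem_cons.mp hd' with h | h
          · subst h
            rw [hx] at hy
            obtain rfl : x = y := by injection hy
            exact c1 x (List.mem_cons_self ..)
          · exact c9 d' h y hy
        · simp only [List.length_cons] at c10; omega

lemma pvNodupGridLen {N M : Nat} {V : List (Nat × Nat)} (hnd : V.Nodup)
    (hg : ∀ c ∈ V, pvGrid N M c) : V.length ≤ N * M := by
  have h1 : V.toFinset ⊆ Finset.range N ×ˢ Finset.range M := by
    intro c hc
    simp only [List.mem_toFinset] at hc
    obtain ⟨h1, h2⟩ := hg c hc
    simp only [Finset.mem_product, Finset.mem_range]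
    exact ⟨h1, h2⟩
  have h2 := Finset.card_le_card h1
  rw [List.toFinset_card_of_nodup hnd] at h2
  simpa [Finset.card_product] using h2

lemma pvSublen {α : Type} [DecidableEq α] {V V' : List α} (hnd : V.Nodup)
    (h : ∀ x ∈ V, x ∈ V') : V.length ≤ V'.length :=
  (List.subperm_of_subset hnd h).length_le

lemma pvDfs_spec (t : List (List Int)) (cf : Bool) (N M si sj : Nat) :
    ∀ (f : Nat) (V S P : List (Nat × Nat)),
    S.length + (N * M - V.length) < f →
    V.Nodup → (∀ c ∈ V, pvGrid N M c) →
    S.Nodup → P.Nodup → (∀ c ∈ S, c ∉ P) →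
    (∀ c ∈ S, c ∈ V) → (∀ c ∈ P, c ∈ V) →
    (∀ c ∈ S, pvRch t (pvTarget cf) N M (si, sj) c) →
    (∀ c ∈ P, pvRch t (pvTarget cf) N M (si, sj) c) →
    ((si, sj) ∈ S ∨ (si, sj) ∈ P) →
    (∀ c ∈ V, pvOk t (pvTarget cf) N M c → pvRch t (pvTarget cf) N M (si, sj) c →
        c ∈ S ∨ c ∈ P) →
    (∀ c ∈ P, ∀ d, pvNbh t (pvTarget cf) N M c d → d ∈ V) →
    ∃ V' P' : List (Nat × Nat),
      pvDfs t cf N M si sj f V S (P.map (fun c => ((c.1 : Int) - si, (c.2 : Int) - sj))) =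
        (V', P'.map (fun c => ((c.1 : Int) - si, (c.2 : Int) - sj))) ∧
      P'.Nodup ∧ (∀ c, c ∈ P' ↔ pvRch t (pvTarget cf) N M (si, sj) c) ∧
      (∀ c ∈ V, c ∈ V') ∧ V'.Nodup ∧ (∀ c ∈ V', pvGrid N M c) ∧
      (∀ c ∈ V', pvOk t (pvTarget cf) N M c → c ∈ V ∨ pvRch t (pvTarget cf) N M (si, sj) c) ∧
      (∀ c ∈ P', c ∈ V') := by
  intro f
  induction f with
  | zero => intro V S P hfuel; omega
  | succ f ih =>
    intro V S P hfuel hVnd hVg hSnd hPnd hSP hSV hPV hSr hPr hsin hVok hPcl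
    match S, hfuel with
    | [], _ =>
      refine ⟨V, P, rfl, hPnd, ?_, fun c h => h, hVnd, hVg, fun c hc _ => Or.inl hc, hPV⟩
      exact pvClosedIff (hsin.resolve_left (by simp)) hPr
        (fun c hc d hd => by
          rcases hVok d (hPcl c hc d hd) hd.2.1 (pvRch_step (hPr c hc) hd) with h | h
          · exact absurd h (by simp)
          · exact h)
    | (ci, cj) :: S', hfuel =>
      obtain ⟨V₁, S₁, hfold, c1, c2, c3, c4, c5, c6, c7, c8, c9, c10⟩ :=
        pvFoldDirs t cf N M ci cj (List.range 4) V S' hVnd (List.Nodup.of_cons hSnd)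
          (fun x hx => hSV x (List.mem_cons_of_mem _ hx))
      have hc_mem : (ci, cj) ∈ V := hSV _ (List.mem_cons_self ..)
      have hc_rch : pvRch t (pvTarget cf) N M (si, sj) (ci, cj) := hSr _ (List.mem_cons_self ..)
      have hc_ok : pvOk t (pvTarget cf) N M (ci, cj) := pvRch_ok hc_rch
      have hV1g : ∀ c ∈ V₁, pvGrid N M c := by
        intro c hc
        rcases c6 c hc with h | ⟨d, _, he⟩
        · exact hVg c h
        · exact pvNbr?_grid he
      have hV1nM : V₁.length ≤ N * M := pvNodupGridLen c3 hV1g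
      have hVV1 : V.length ≤ V₁.length := pvSublen hVnd c1
      have hP1nd : (P ++ [(ci, cj)]).Nodup := by
        rw [List.nodup_append]
        refine ⟨hPnd, List.nodup_singleton _, ?_⟩
        intro a ha b hb
        rw [List.mem_singleton] at hb
        subst hb
        exact fun e => hSP _ (List.mem_cons_self ..) (e ▸ ha)
      have hnew_rch : ∀ x ∈ S₁, pvRch t (pvTarget cf) N M (si, sj) x := by
        intro x hx
        rcases c7 x hx with h | ⟨hxV, hxok, d, hd, he⟩
        · exact hSr x (List.mem_cons_of_mem _ h)
        · refine pvRch_step hc_rch ⟨hc_ok, ⟨(pvNbr?_grid he).1, (pvNbr?_grid he).2, hxok⟩, ?_⟩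
          exact pvNbr?_adj (by simpa using hd) he
      obtain ⟨V', P', heq, d1, d2, d3, d4, d5, d6, d7⟩ :=
        ih V₁ S₁ (P ++ [(ci, cj)])
          (by simp only [List.length_cons] at hfuel; omega)
          c3 hV1g c4 hP1nd
          (by
            intro c hc
            simp only [List.mem_append, List.mem_singleton]
            rintro (h | heq)
            · rcases c7 c hc with h2 | ⟨hxV, _, _⟩
              · exact hSP c (List.mem_cons_of_mem _ h2) h
              · exact hxV (hPV c h)
            · rcases c7 c hc with h2 | ⟨hxV, _, _⟩
              · exact (List.nodup_cons.mp hSnd).1 (heq ▸ h2)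
              · exact hxV (heq ▸ hc_mem))
          c5
          (by
            intro c hc
            simp only [List.mem_append, List.mem_singleton] at hc
            rcases hc with h | rfl
            · exact c1 c (hPV c h)
            · exact c1 _ hc_mem)
          hnew_rch
          (by
            intro c hc
            simp only [List.mem_append, List.mem_singleton] at hc
            rcases hc with h | rfl
            · exact hPr c h
            · exact hc_rch)
          (by
            rcases hsin with h | h
            · rcases List.mem_cons.mp h with h | h
              · exact Or.inr (by simp [h])
              · exact Or.inl (c2 _ h)
            · exact Or.inr (by simp [h]))
          (by
            intro c hc hok hrch
            by_cases hcV : c ∈ V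
            · rcases hVok c hcV hok hrch with h | h
              · rcases List.mem_cons.mp h with h | h
                · exact Or.inr (by simp [h])
                · exact Or.inl (c2 _ h)
              · exact Or.inr (by simp [h])
            · exact Or.inl (c8 c hc hcV hok.2.2))
          (by
            intro c hc d hd
            simp only [List.mem_append, List.mem_singleton] at hc
            rcases hc with h | rfl
            · exact c1 d (hPcl c h d hd)
            · obtain ⟨k, hk, he⟩ := pvAdj_nbr? (N := N) (M := M)
                ⟨hd.2.1.1, hd.2.1.2.1⟩ hd.2.2
              exact c9 k (by simpa using hk) d he)
      refine ⟨V', P', ?_, d1, d2, fun c hc => d3 c (c1 c hc), d4, d5, ?_, d7⟩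
      · rw [← heq]
        show pvDfs t cf N M si sj (f + 1) V ((ci, cj) :: S') _ = _
        conv_lhs => rw [pvDfs]
        simp only [hfold, List.map_append]
        rfl
      · intro c hc hok
        rcases d6 c hc hok with h | h
        · rcases c6 c h with h2 | ⟨d, _, he⟩
          · exact Or.inl h2
          · by_cases hcV : c ∈ V
            · exact Or.inl hcV
            · refine Or.inr (pvRch_step hc_rch ⟨hc_ok, hok, pvNbr?_adj (by simp at *; omega) he⟩)
        · exact Or.inr h

-- A's four-accumulator min/max fold, componentwise
lemma pvFold4 (p : List (Int × Int)) : ∀ (a b c d : Int),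
    p.foldl (fun (st : Int × Int × Int × Int) q =>
        (min st.1 q.1, max st.2.1 q.1, min st.2.2.1 q.2, max st.2.2.2 q.2)) (a, b, c, d) =
      ((p.map Prod.fst).foldl min a, (p.map Prod.fst).foldl max b,
       (p.map Prod.snd).foldl min c, (p.map Prod.snd).foldl max d) := by
  induction p with
  | nil => intro a b c d; rfl
  | cons q p ih => intro a b c d; simp only [List.foldl_cons, List.map_cons, ih]

lemma pvFoldlMin_le (l : List Int) : ∀ a : Int, l.foldl min a ≤ a ∧ ∀ y ∈ l, l.foldl min a ≤ y := by
  induction l with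
  | nil => intro a; simp
  | cons x l ih =>
    intro a
    obtain ⟨h1, h2⟩ := ih (min a x)
    simp only [List.foldl_cons]
    refine ⟨le_trans h1 (min_le_left a x), ?_⟩
    intro y hy
    rcases List.mem_cons.mp hy with h | h
    · subst h; exact le_trans h1 (min_le_right _ _)
    · exact h2 y h

lemma pvFoldlMin_mem (l : List Int) : ∀ a : Int, l.foldl min a = a ∨ l.foldl min a ∈ l := by
  induction l with
  | nil => intro a; simp
  | cons x l ih =>
    intro a
    rcases ih (min a x) with h | h
    · simp only [List.foldl_cons, h]
      rcases min_choice a x with h' | h'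
      · exact Or.inl h'
      · exact Or.inr (by simp [h'])
    · exact Or.inr (List.mem_cons_of_mem _ h)

lemma pvFoldlMax_ge (l : List Int) : ∀ a : Int, a ≤ l.foldl max a ∧ ∀ y ∈ l, y ≤ l.foldl max a := by
  induction l with
  | nil => intro a; simp
  | cons x l ih =>
    intro a
    obtain ⟨h1, h2⟩ := ih (max a x)
    simp only [List.foldl_cons]
    refine ⟨le_trans (le_max_left a x) h1, ?_⟩
    intro y hy
    rcases List.mem_cons.mp hy with h | h
    · subst h; exact le_trans (le_max_right _ _) h1
    · exact h2 y h

lemma pvFoldlMax_mem (l : List Int) : ∀ a : Int, l.foldl max a = a ∨ l.foldl max a ∈ l := by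
  induction l with
  | nil => intro a; simp
  | cons x l ih =>
    intro a
    rcases ih (max a x) with h | h
    · simp only [List.foldl_cons, h]
      rcases max_choice a x with h' | h'
      · exact Or.inl h'
      · exact Or.inr (by simp [h'])
    · exact Or.inr (List.mem_cons_of_mem _ h)

lemma pvFoldlMin_eq {l : List Int} {a m : Int} (hm : m ∈ l) (hlb : ∀ y ∈ l, m ≤ y)
    (hma : m ≤ a) : l.foldl min a = m := by
  have h1 := (pvFoldlMin_le l a).1
  have h2 := (pvFoldlMin_le l a).2 m hm
  rcases pvFoldlMin_mem l a with h | h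
  · omega
  · exact le_antisymm h2 (hlb _ h)

lemma pvFoldlMax_eq {l : List Int} {a m : Int} (hm : m ∈ l) (hub : ∀ y ∈ l, y ≤ m)
    (hma : a ≤ m) : l.foldl max a = m := by
  have h1 := (pvFoldlMax_ge l a).1
  have h2 := (pvFoldlMax_ge l a).2 m hm
  rcases pvFoldlMax_mem l a with h | h
  · omega
  · exact le_antisymm (hub _ h) h2

-- ===== rectangular 0/1 grids =====
def pvRect (R C : Nat) (g : List (List Int)) : Prop :=
  g.length = R ∧ ∀ i, i < R → (g.getD i []).length = C

def pvEntry (g : List (List Int)) (y x : Nat) : Int := (g.getD y []).getD x 0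

lemma pvEntry_eq_getElem {g : List (List Int)} {y x : Nat} (hy : y < g.length)
    (hx : x < g[y].length) : pvEntry g y x = g[y][x] := by
  unfold pvEntry
  have hrow : g.getD y [] = g[y] := by
    rw [List.getD_eq_getElem?_getD, List.getElem?_eq_getElem hy]; simp
  rw [hrow, List.getD_eq_getElem?_getD, List.getElem?_eq_getElem hx]
  simp

lemma pvRowLen {R C : Nat} {g : List (List Int)} (hg : pvRect R C g) {y : Nat}
    (hy : y < g.length) : g[y].length = C := by
  have h1 := hg.2 y (hg.1 ▸ hy)
  rw [List.getD_eq_getElem?_getD, List.getElem?_eq_getElem hy] at h1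
  simpa using h1

lemma pvRect_ext {R C : Nat} {g g' : List (List Int)} (hg : pvRect R C g) (hg' : pvRect R C g')
    (h : ∀ y, y < R → ∀ x, x < C → pvEntry g y x = pvEntry g' y x) : g = g' := by
  apply List.ext_getElem (by rw [hg.1, hg'.1])
  intro y hy hy'
  have hyR : y < R := hg.1 ▸ hy
  apply List.ext_getElem (by rw [pvRowLen hg hy, pvRowLen hg' hy'])
  intro x hx hx'
  have hxC : x < C := by rw [pvRowLen hg hy] at hx; exact hx
  have := h y hyR x hxC
  rwa [pvEntry_eq_getElem hy hx, pvEntry_eq_getElem hy' hx'] at this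

lemma pvRect_set2d {R C : Nat} {g : List (List Int)} (hg : pvRect R C g) (r c : Nat) :
    pvRect R C (pvSet2d g r c) := by
  unfold pvSet2d
  refine ⟨by rw [List.length_modify]; exact hg.1, ?_⟩
  intro i hi
  have hil : i < g.length := hg.1 ▸ hi
  by_cases hir : i = r
  · subst hir
    have : (g.modify i fun row => row.set c 1).getD i [] = g[i].set c 1 := by
      rw [List.getD_eq_getElem?_getD, List.getElem?_modify, List.getElem?_eq_getElem hil]
      simp
    rw [this, List.length_set]
    have := hg.2 i hi
    rw [List.getD_eq_getElem?_getD, List.getElem?_eq_getElem hil] at this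
    simpa using this
  · have hir' : r ≠ i := fun e => hir e.symm
    have : (g.modify r fun row => row.set c 1).getD i [] = g.getD i [] := by
      rw [List.getD_eq_getElem?_getD, List.getElem?_modify]
      simp [hir', List.getD_eq_getElem?_getD]
    rw [this]
    exact hg.2 i hi

lemma pvSet2d_entry {R C : Nat} {g : List (List Int)} (hg : pvRect R C g) (r c y x : Nat)
    (hy : y < R) (hx : x < C) :
    pvEntry (pvSet2d g r c) y x = if y = r ∧ x = c then 1 else pvEntry g y x := by
  have hyl : y < g.length := hg.1 ▸ hy
  unfold pvSet2d pvEntry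
  by_cases hyr : y = r
  · subst hyr
    have hrow : (g.modify y fun row => row.set c 1).getD y [] = g[y].set c 1 := by
      rw [List.getD_eq_getElem?_getD, List.getElem?_modify, List.getElem?_eq_getElem hyl]
      simp
    rw [hrow]
    by_cases hxc : x = c
    · subst hxc
      have hxl : x < g[y].length := by rw [pvRowLen hg hyl]; exact hx
      rw [List.getD_eq_getElem?_getD, List.getElem?_set_self (by simpa using hxl)]
      simp
    · have hrow2 : g.getD y [] = g[y] := by
        rw [List.getD_eq_getElem?_getD, List.getElem?_eq_getElem hyl]; simp
      rw [if_neg (by tauto), hrow2, List.getD_eq_getElem?_getD,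
        List.getElem?_set_ne (fun e => hxc e.symm), ← List.getD_eq_getElem?_getD]
  · have hyr' : r ≠ y := fun e => hyr e.symm
    have hrow : (g.modify r fun row => row.set c 1).getD y [] = g.getD y [] := by
      rw [List.getD_eq_getElem?_getD, List.getElem?_modify]
      simp [hyr', List.getD_eq_getElem?_getD]
    rw [hrow, if_neg (by tauto)]

lemma pvRect_fill {R C : Nat} (φ : Int × Int → Nat × Nat) :
    ∀ (l : List (Int × Int)) (g : List (List Int)), pvRect R C g →
    pvRect R C (l.foldl (fun sq q => pvSet2d sq (φ q).1 (φ q).2) g) := by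
  intro l
  induction l with
  | nil => intro g hg; exact hg
  | cons q l ih =>
    intro g hg
    simp only [List.foldl_cons]
    exact ih _ (pvRect_set2d hg _ _)

lemma pvFill_entry {R C : Nat} (φ : Int × Int → Nat × Nat) :
    ∀ (l : List (Int × Int)) (g : List (List Int)), pvRect R C g →
    ∀ y x, y < R → x < C →
    pvEntry (l.foldl (fun sq q => pvSet2d sq (φ q).1 (φ q).2) g) y x =
      if ∃ q ∈ l, φ q = (y, x) then 1 else pvEntry g y x := by
  intro l
  induction l with
  | nil => intro g hg y x hy hx; simp
  | cons q l ih =>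
    intro g hg y x hy hx
    simp only [List.foldl_cons]
    rw [ih _ (pvRect_set2d hg _ _) y x hy hx, pvSet2d_entry hg _ _ _ _ hy hx]
    by_cases h1 : ∃ p ∈ l, φ p = (y, x)
    · rw [if_pos h1, if_pos (by obtain ⟨p, hp, he⟩ := h1; exact ⟨p, List.mem_cons_of_mem _ hp, he⟩)]
    · rw [if_neg h1]
      by_cases h2 : y = (φ q).1 ∧ x = (φ q).2
      · rw [if_pos h2, if_pos ⟨q, List.mem_cons_self .., by
          obtain ⟨ha, hb⟩ := h2; exact Prod.ext ha.symm hb.symm⟩]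
      · rw [if_neg h2, if_neg (by
          rintro ⟨p, hp, he⟩
          rcases List.mem_cons.mp hp with h | h
          · subst h; exact h2 ⟨by rw [he], by rw [he]⟩
          · exact h1 ⟨p, h, he⟩)]

lemma pvFoldlSome {α β : Type} (F : Option β → α → Option β)
    (hstep : ∀ b a, ∃ b', F (some b) a = some b') :
    ∀ (l : List α) (b : β), ∃ b', l.foldl F (some b) = some b' := by
  intro l
  induction l with
  | nil => exact fun b => ⟨b, rfl⟩
  | cons x l ih =>
    intro b
    rw [List.foldl_cons]
    obtain ⟨b', hb⟩ := hstep b x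
    rw [hb]
    exact ih b'

lemma pvMin?_some (xs : List Nat) (h : xs ≠ []) :
    ∃ m, PySem.List.min? xs (fun x => x) = some m := by
  cases xs with
  | nil => exact absurd rfl h
  | cons a l =>
    unfold PySem.List.min?
    rw [List.foldl_cons]
    exact pvFoldlSome _ (fun b x => by dsimp only; split <;> exact ⟨_, rfl⟩) l a

lemma pvMax?_some (xs : List Nat) (h : xs ≠ []) :
    ∃ m, PySem.List.max? xs (fun x => x) = some m := by
  cases xs with
  | nil => exact absurd rfl h
  | cons a l =>
    unfold PySem.List.max?
    rw [List.foldl_cons]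
    exact pvFoldlSome _ (fun b x => by dsimp only; split <;> exact ⟨_, rfl⟩) l a

lemma pvRect_replicate (R C : Nat) : pvRect R C (List.replicate R (List.replicate C (0 : Int))) :=
  ⟨List.length_replicate, fun i hi => by rw [List.getD_replicate _ hi, List.length_replicate]⟩

lemma pvEntry_replicate {R C y x : Nat} (hy : y < R) (hx : x < C) :
    pvEntry (List.replicate R (List.replicate C (0 : Int))) y x = 0 := by
  unfold pvEntry
  rw [List.getD_replicate _ hy, List.getD_replicate _ hx]

lemma pvRect_mapRange (R C : Nat) (f : Nat → Nat → Int) :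
    pvRect R C ((List.range R).map (fun dy => (List.range C).map (fun dx => f dy dx))) := by
  refine ⟨by simp, ?_⟩
  intro i hi
  rw [List.getD_eq_getElem?_getD, List.getElem?_map, List.getElem?_range hi]
  simp

lemma pvMapRange_entry {R C : Nat} (f : Nat → Nat → Int) {y x : Nat} (hy : y < R) (hx : x < C) :
    pvEntry ((List.range R).map (fun dy => (List.range C).map (fun dx => f dy dx))) y x = f y x := by
  unfold pvEntry
  have hrow : ((List.range R).map (fun dy => (List.range C).map (fun dx => f dy dx))).getD y []
      = (List.range C).map (fun dx => f y dx) := by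
    rw [List.getD_eq_getElem?_getD, List.getElem?_map, List.getElem?_range hy]
    simp
  rw [hrow, List.getD_eq_getElem?_getD, List.getElem?_map, List.getElem?_range hx]
  simp

-- A's to_squares of the piece list equals the membership-mask comprehension over the cell list
lemma pvPieceEq (P' comp : List (Nat × Nat)) (i j : Nat)
    (hmem : ∀ c, c ∈ P' ↔ c ∈ comp) (hs : (i, j) ∈ comp)
    (hge : ∀ c ∈ comp, i ≤ c.1 ∧ (c.1 = i → j ≤ c.2))
    (My mx Mx : Nat)
    (hMy : PySem.List.max? (comp.map Prod.fst) (fun x => x) = some My)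
    (hmx : PySem.List.min? (comp.map Prod.snd) (fun x => x) = some mx)
    (hMx : PySem.List.max? (comp.map Prod.snd) (fun x => x) = some Mx) :
    to_squares (P'.map (fun c => ((c.1 : Int) - i, (c.2 : Int) - j))) =
      (List.range (My + 1 - i)).map (fun dy => (List.range (Mx + 1 - mx)).map
        (fun dx => if PySem.Set.contains comp (i + dy, mx + dx) then (1 : Int) else 0)) := by
  have hge1 : ∀ c ∈ comp, i ≤ c.1 := fun c hc => (hge c hc).1
  have hMyub : ∀ c ∈ comp, c.1 ≤ My := fun c hc =>
    PySem.List.max?_isMax hMy c.1 (List.mem_map_of_mem hc)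
  have hmxlb : ∀ c ∈ comp, mx ≤ c.2 := fun c hc =>
    PySem.List.min?_isMin hmx c.2 (List.mem_map_of_mem hc)
  have hMxub : ∀ c ∈ comp, c.2 ≤ Mx := fun c hc =>
    PySem.List.max?_isMax hMx c.2 (List.mem_map_of_mem hc)
  have hiMy : i ≤ My := hMyub _ hs
  have hmxj : mx ≤ j := hmxlb _ hs
  have hjMx : j ≤ Mx := hMxub _ hs
  obtain ⟨cMy, hcMy, hcMye⟩ := List.mem_map.mp (PySem.List.max?_mem hMy)
  obtain ⟨cmx, hcmx, hcmxe⟩ := List.mem_map.mp (PySem.List.min?_mem hmx)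
  obtain ⟨cMx, hcMx, hcMxe⟩ := List.mem_map.mp (PySem.List.max?_mem hMx)
  unfold to_squares
  rw [pvFold4]
  have hfst : ((P'.map (fun c => ((c.1 : Int) - i, (c.2 : Int) - j))).map Prod.fst) =
      P'.map (fun c => (c.1 : Int) - i) := by rw [List.map_map]; rfl
  have hsnd : ((P'.map (fun c => ((c.1 : Int) - i, (c.2 : Int) - j))).map Prod.snd) =
      P'.map (fun c => (c.2 : Int) - j) := by rw [List.map_map]; rfl
  rw [hfst, hsnd]
  have hminy : (P'.map (fun c => (c.1 : Int) - i)).foldl min 99 = 0 := by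
    refine pvFoldlMin_eq (List.mem_map.mpr ⟨(i, j), (hmem _).mpr hs, by simp⟩) ?_ (by omega)
    intro y hy
    obtain ⟨c, hc, rfl⟩ := List.mem_map.mp hy
    have := hge1 c ((hmem c).mp hc)
    omega
  have hmaxy : (P'.map (fun c => (c.1 : Int) - i)).foldl max 0 = (My : Int) - i := by
    refine pvFoldlMax_eq (List.mem_map.mpr ⟨cMy, (hmem _).mpr hcMy, by rw [hcMye]⟩) ?_ (by omega)
    intro y hy
    obtain ⟨c, hc, rfl⟩ := List.mem_map.mp hy
    have := hMyub c ((hmem c).mp hc)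
    omega
  have hminx : (P'.map (fun c => (c.2 : Int) - j)).foldl min 99 = (mx : Int) - j := by
    refine pvFoldlMin_eq (List.mem_map.mpr ⟨cmx, (hmem _).mpr hcmx, by rw [hcmxe]⟩) ?_ (by omega)
    intro y hy
    obtain ⟨c, hc, rfl⟩ := List.mem_map.mp hy
    have := hmxlb c ((hmem c).mp hc)
    omega
  have hmaxx : (P'.map (fun c => (c.2 : Int) - j)).foldl max 0 = (Mx : Int) - j := by
    refine pvFoldlMax_eq (List.mem_map.mpr ⟨cMx, (hmem _).mpr hcMx, by rw [hcMxe]⟩) ?_ (by omega)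
    intro y hy
    obtain ⟨c, hc, rfl⟩ := List.mem_map.mp hy
    have := hMxub c ((hmem c).mp hc)
    omega
  rw [hminy, hmaxy, hminx, hmaxx]
  simp only [sub_zero]
  have hR : ((My : Int) - i + 1).toNat = My + 1 - i := by omega
  have hC : ((Mx : Int) - j - ((mx : Int) - j) + 1).toNat = Mx + 1 - mx := by omega
  rw [hR, hC]
  refine pvRect_ext
    (pvRect_fill (R := My + 1 - i) (C := Mx + 1 - mx)
      (fun q => (q.1.toNat, (q.2 - ((mx : Int) - j)).toNat)) _ _
      (pvRect_replicate _ _))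
    (pvRect_mapRange _ _ _) ?_
  intro y hy x hx
  rw [pvFill_entry (fun q => (q.1.toNat, (q.2 - ((mx : Int) - j)).toNat)) _ _
      (pvRect_replicate _ _) y x hy hx,
    pvMapRange_entry _ hy hx]
  have hcond : (∃ q ∈ P'.map (fun c => ((c.1 : Int) - i, (c.2 : Int) - j)),
      ((q.1.toNat, (q.2 - ((mx : Int) - j)).toNat) : Nat × Nat) = (y, x)) ↔
      (i + y, mx + x) ∈ comp := by
    constructor
    · rintro ⟨q, hq, he⟩
      obtain ⟨c, hc, rfl⟩ := List.mem_map.mp hq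
      have hcm := (hmem c).mp hc
      have h1 := hge1 c hcm
      have h2 := hmxlb c hcm
      simp only [Prod.mk.injEq] at he
      obtain ⟨he1, he2⟩ := he
      have hc1 : c.1 = i + y := by omega
      have hc2 : c.2 = mx + x := by omega
      rwa [← hc1, ← hc2, Prod.mk.eta]
    · intro hm
      refine ⟨((i + y : Nat) - (i : Int), ((mx + x : Nat) : Int) - j),
        List.mem_map.mpr ⟨(i + y, mx + x), (hmem _).mpr hm, rfl⟩, ?_⟩
      simp only [Prod.mk.injEq]
      constructor <;> omega
  by_cases hmemb : (i + y, mx + x) ∈ comp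
  · rw [if_pos (hcond.mpr hmemb), if_pos ((PySem.Set.contains_iff _ _).mpr hmemb)]
  · rw [if_neg (fun hc => hmemb (hcond.mp hc)),
      if_neg (fun hc => hmemb ((PySem.Set.contains_iff _ _).mp hc)),
      pvEntry_replicate hy hx]

-- ===== the row-major cell order =====
def pvCells (N M : Nat) : List (Nat × Nat) :=
  (List.range N).flatMap (fun i => (List.range M).map (fun j => (i, j)))

def pvRmLt (c d : Nat × Nat) : Prop := c.1 < d.1 ∨ (c.1 = d.1 ∧ c.2 < d.2)

lemma pvMem_cells {N M : Nat} {c : Nat × Nat} : c ∈ pvCells N M ↔ c.1 < N ∧ c.2 < M := by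
  unfold pvCells
  simp only [List.mem_flatMap, List.mem_map, List.mem_range]
  constructor
  · rintro ⟨i, hi, j, hj, rfl⟩; exact ⟨hi, hj⟩
  · intro ⟨h1, h2⟩; exact ⟨c.1, h1, c.2, h2, rfl⟩

lemma pvCells_pairwise (N M : Nat) : (pvCells N M).Pairwise pvRmLt := by
  unfold pvCells
  rw [List.pairwise_flatMap]
  constructor
  · intro i _
    rw [List.pairwise_map]
    exact (List.pairwise_lt_range).imp (fun h => Or.inr ⟨rfl, h⟩)
  · exact (List.pairwise_lt_range).imp (by
      rintro a b hab x hx y hy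
      obtain ⟨j, _, rfl⟩ := List.mem_map.mp hx
      obtain ⟨k, _, rfl⟩ := List.mem_map.mp hy
      exact Or.inl hab)

lemma pvFoldlFlat {α σ : Type} (f : σ → α → σ) (g : Nat → List α) :
    ∀ (l : List Nat) (init : σ),
    (l.flatMap g).foldl f init = l.foldl (fun st a => (g a).foldl f st) init := by
  intro l
  induction l with
  | nil => intro init; rfl
  | cons a l ih =>
    intro init
    rw [List.flatMap_cons, List.foldl_append, List.foldl_cons, ih]

lemma pvNestedFold {σ : Type} (F : σ → Nat → Nat → σ) (N M : Nat) (init : σ) :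
    (List.range N).foldl (fun st i => (List.range M).foldl (fun st j => F st i j) st) init
      = (pvCells N M).foldl (fun st c => F st c.1 c.2) init := by
  unfold pvCells
  rw [pvFoldlFlat]
  congr 1
  funext st i
  rw [List.foldl_map]

-- absorbing one processed cell into the reached-from-earlier set
lemma pvAbsorb {t : List (List Int)} {tgt : Int} {N M : Nat} {pr : List (Nat × Nat)}
    {c : Nat × Nat} (h : pvOk t tgt N M c → ∃ d ∈ pr, pvRch t tgt N M d c) :
    ∀ x, (∃ d ∈ pr ++ [c], pvRch t tgt N M d x) ↔ ∃ d ∈ pr, pvRch t tgt N M d x := by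
  intro x
  constructor
  · rintro ⟨d, hd, hr⟩
    rcases List.mem_append.mp hd with hd | hd
    · exact ⟨d, hd, hr⟩
    · rw [List.mem_singleton] at hd
      subst hd
      obtain ⟨e, he, her⟩ := h hr.1
      exact ⟨e, he, pvRch_trans her hr⟩
  · rintro ⟨d, hd, hr⟩
    exact ⟨d, List.mem_append_left _ hd, hr⟩

-- ===== B-side notions: row-major indices, the matching-cell list, starts =====
def pvKey (c : Nat × Nat) : Int × Int := ((c.1 : Int), (c.2 : Int))

def pvIdx (M : Nat) (c : Nat × Nat) : Int := (c.1 : Int) * (M : Int) + (c.2 : Int)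

def pvMatch (t : List (List Int)) (tgt : Int) (N M : Nat) : List (Nat × Nat) :=
  (pvCells N M).filter (fun c => pvCell t c.1 c.2 == tgt)

def pvIsStart (t : List (List Int)) (tgt : Int) (N M : Nat) (s : Nat × Nat) : Prop :=
  pvOk t tgt N M s ∧ ∀ x, pvRch t tgt N M s x → ¬ pvRmLt x s

lemma pvKey_inj {c d : Nat × Nat} (h : pvKey c = pvKey d) : c = d := by
  obtain ⟨c1, c2⟩ := c; obtain ⟨d1, d2⟩ := d
  simp only [pvKey, Prod.mk.injEq] at h
  exact Prod.ext (by exact_mod_cast h.1) (by exact_mod_cast h.2)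

lemma pvMem_match {t tgt N M} {c : Nat × Nat} :
    c ∈ pvMatch t tgt N M ↔ pvOk t tgt N M c := by
  unfold pvMatch pvOk
  rw [List.mem_filter]
  simp only [beq_iff_eq, pvMem_cells]
  tauto

lemma pvRmLt_ne {c d : Nat × Nat} (h : pvRmLt c d) : c ≠ d := by
  intro he; subst he; unfold pvRmLt at h; omega

lemma pvRmLt_tri (c d : Nat × Nat) : pvRmLt c d ∨ c = d ∨ pvRmLt d c := by
  obtain ⟨c1, c2⟩ := c; obtain ⟨d1, d2⟩ := d
  unfold pvRmLt
  simp only [Prod.mk.injEq]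
  omega

lemma pvCells_nodup (N M : Nat) : (pvCells N M).Nodup :=
  (pvCells_pairwise N M).imp (fun h => pvRmLt_ne h)

lemma pvMatch_nodup (t : List (List Int)) (tgt : Int) (N M : Nat) :
    (pvMatch t tgt N M).Nodup := (pvCells_nodup N M).filter _

lemma pvIdx_lt_iff {M : Nat} {c d : Nat × Nat} (hc : c.2 < M) (hd : d.2 < M) :
    pvIdx M c < pvIdx M d ↔ pvRmLt c d := by
  obtain ⟨c1, c2⟩ := c; obtain ⟨d1, d2⟩ := d
  simp only [pvIdx, pvRmLt] at *
  constructor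
  · intro h
    by_cases h1 : c1 < d1
    · exact Or.inl h1
    · right
      have hc1 : d1 ≤ c1 := by omega
      have : d1 * M + d2 ≤ c1 * M + d2 := by
        have := Nat.mul_le_mul_right M hc1
        omega
      constructor
      · by_contra hne
        have hlt : d1 < c1 := by omega
        have : d1 + 1 ≤ c1 := hlt
        have h2 : (d1 + 1) * M ≤ c1 * M := Nat.mul_le_mul_right M this
        have : (d1 : Int) * M + M ≤ (c1 : Int) * M := by push_cast at h2 ⊢; linarith
        omega
      · have he : c1 = d1 := by
          by_contra hne
          have hlt : d1 < c1 := by omega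
          have h2 : (d1 + 1) * M ≤ c1 * M := Nat.mul_le_mul_right M hlt
          have : (d1 : Int) * M + M ≤ (c1 : Int) * M := by push_cast at h2 ⊢; linarith
          omega
        subst he; omega
  · rintro (h | ⟨h1, h2⟩)
    · have h2 : (c1 + 1) * M ≤ d1 * M := Nat.mul_le_mul_right M h
      have : (c1 : Int) * M + M ≤ (d1 : Int) * M := by push_cast at h2 ⊢; linarith
      omega
    · subst h1; omega

lemma pvIdx_inj {M : Nat} {c d : Nat × Nat} (hc : c.2 < M) (hd : d.2 < M)
    (h : pvIdx M c = pvIdx M d) : c = d := by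
  rcases pvRmLt_tri c d with ht | ht | ht
  · exact absurd ((pvIdx_lt_iff hc hd).mpr ht) (by omega)
  · exact ht
  · exact absurd ((pvIdx_lt_iff hd hc).mpr ht) (by omega)

lemma pvIdx_nonneg (M : Nat) (c : Nat × Nat) : 0 ≤ pvIdx M c := by
  unfold pvIdx; positivity

lemma pvStartUnique {t tgt N M} {s s' : Nat × Nat} (hs : pvIsStart t tgt N M s)
    (hs' : pvIsStart t tgt N M s') (h : pvRch t tgt N M s s') : s = s' := by
  rcases pvRmLt_tri s s' with ht | ht | ht
  · exact absurd ht (hs'.2 s (pvRch_symm h))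
  · exact ht
  · exact absurd ht (hs.2 s' h)

-- the four Int neighbour offsets match pvAdj exactly
lemma pvNbs_adj {c d : Nat × Nat} (h : pvKey d ∈ pvNbs (pvKey c)) : pvAdj c d := by
  obtain ⟨c1, c2⟩ := c; obtain ⟨d1, d2⟩ := d
  simp only [pvNbs, pvKey, List.mem_cons, List.not_mem_nil, or_false, Prod.mk.injEq] at h
  unfold pvAdj
  simp only
  rcases h with ⟨h1, h2⟩ | ⟨h1, h2⟩ | ⟨h1, h2⟩ | ⟨h1, h2⟩ <;> omega

lemma pvAdj_nbs {c d : Nat × Nat} (h : pvAdj c d) : pvKey d ∈ pvNbs (pvKey c) := by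
  obtain ⟨c1, c2⟩ := c; obtain ⟨d1, d2⟩ := d
  rcases h with ⟨h1, h2 | h2⟩ | ⟨h1, h2 | h2⟩ <;>
    simp only [pvNbs, pvKey, List.mem_cons, List.not_mem_nil, or_false, Prod.mk.injEq] <;>
    [right; right; skip; left] <;> first
      | (left; omega) | (right; left; omega) | (right; right; omega) | omega

-- getD of a present key does not depend on the default
lemma pvGetD_default {κ ν : Type} [BEq κ] [LawfulBEq κ] (d : PySem.Dict κ ν) (k : κ)
    (h : d.contains k = true) (a b : ν) : d.getD k a = d.getD k b := by
  rw [PySem.Dict.getD_eq_get?_getD, PySem.Dict.getD_eq_get?_getD]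
  rw [PySem.Dict.contains_eq_isSome_get?] at h
  obtain ⟨v, hv⟩ := Option.isSome_iff_exists.mp h
  rw [hv]; rfl

-- ===== phase 1: the initial label dict =====
lemma pvInit_items (t : List (List Int)) (tgt : Int) (N M : Nat) :
    (pvInit t tgt N M).items = (pvMatch t tgt N M).map (fun c => (pvKey c, pvIdx M c)) := by
  unfold pvInit
  rw [pvNestedFold (fun (L : PySem.Dict (Int × Int) Int) i j =>
    if pvCell t i j == tgt then L.insert ((i : Int), (j : Int)) ((i : Int) * (M : Int) + (j : Int))
    else L)]
  rw [PySem.List.foldl_if_eq_foldl_filter (fun c : Nat × Nat => pvCell t c.1 c.2 == tgt)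
    (fun (L : PySem.Dict (Int × Int) Int) (c : Nat × Nat) =>
      L.insert ((c.1 : Int), (c.2 : Int)) ((c.1 : Int) * (M : Int) + (c.2 : Int)))]
  rw [show List.filter (fun c : Nat × Nat => pvCell t c.1 c.2 == tgt) (pvCells N M)
      = pvMatch t tgt N M from rfl]
  rw [PySem.Dict.items_foldl_insert_fresh (pvMatch t tgt N M)
    (fun c : Nat × Nat => ((c.1 : Int), (c.2 : Int)))
    (fun c : Nat × Nat => ((c.1 : Int) * (M : Int) + (c.2 : Int)))
    PySem.Dict.empty (fun a _ => PySem.Dict.contains_empty _)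
    ((pvMatch_nodup t tgt N M).map (fun _ _ h => pvKey_inj h))]
  rfl

lemma pvInit_keys (t : List (List Int)) (tgt : Int) (N M : Nat) :
    (pvInit t tgt N M).keys = (pvMatch t tgt N M).map pvKey := by
  show ((pvInit t tgt N M).items.map Prod.fst) = _
  rw [pvInit_items, List.map_map]
  rfl

-- ===== phase 2: the relaxation invariant =====
def pvVals (t : List (List Int)) (tgt : Int) (N M : Nat) (L : PySem.Dict (Int × Int) Int) : Prop :=
  L.keys = (pvMatch t tgt N M).map pvKey ∧
  (∀ c ∈ pvMatch t tgt N M, ∃ x, pvRch t tgt N M c x ∧ L.getD (pvKey c) 0 = pvIdx M x) ∧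
  (∀ c ∈ pvMatch t tgt N M, L.getD (pvKey c) 0 ≤ pvIdx M c)

lemma pvVals_contains {t tgt N M L} (h : pvVals t tgt N M L) (c : Nat × Nat) :
    L.contains (pvKey c) = true ↔ pvOk t tgt N M c := by
  rw [PySem.Dict.contains_iff_mem_keys, h.1, ← pvMem_match]
  constructor
  · intro hm
    obtain ⟨d, hd, he⟩ := List.mem_map.mp hm
    exact (pvKey_inj he.symm) ▸ hd
  · exact fun hm => List.mem_map_of_mem hm

lemma pvVals_init (t : List (List Int)) (tgt : Int) (N M : Nat) :
    pvVals t tgt N M (pvInit t tgt N M) := by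
  have hnd : (pvInit t tgt N M).keys.Nodup := by
    rw [pvInit_keys]; exact (pvMatch_nodup t tgt N M).map (fun _ _ => pvKey_inj)
  refine ⟨pvInit_keys t tgt N M, ?_, ?_⟩
  · intro c hc
    have hm : (pvKey c, pvIdx M c) ∈ (pvInit t tgt N M).items := by
      rw [pvInit_items]; exact List.mem_map_of_mem hc
    exact ⟨c, pvRch_refl (pvMem_match.mp hc), PySem.Dict.getD_of_mem_items _ hm hnd 0⟩
  · intro c hc
    have hm : (pvKey c, pvIdx M c) ∈ (pvInit t tgt N M).items := by
      rw [pvInit_items]; exact List.mem_map_of_mem hc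
    rw [PySem.Dict.getD_of_mem_items _ hm hnd 0]

-- the running-min fold over the four neighbour lookups
lemma pvMinFold (L : PySem.Dict (Int × Int) Int) (nbs : List (Int × Int)) : ∀ v0 : Int,
    (nbs.foldl (fun v nb => if L.getD nb v < v then L.getD nb v else v) v0 = v0 ∨
      ∃ nb ∈ nbs, L.contains nb = true ∧
        nbs.foldl (fun v nb => if L.getD nb v < v then L.getD nb v else v) v0 = L.getD nb 0) ∧
    nbs.foldl (fun v nb => if L.getD nb v < v then L.getD nb v else v) v0 ≤ v0 ∧
    (∀ nb ∈ nbs, L.contains nb = true →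
      nbs.foldl (fun v nb => if L.getD nb v < v then L.getD nb v else v) v0 ≤ L.getD nb 0) := by
  induction nbs with
  | nil => intro v0; exact ⟨Or.inl rfl, le_refl _, by simp⟩
  | cons nb nbs ih =>
    intro v0
    simp only [List.foldl_cons]
    by_cases hc : L.contains nb = true
    · have hd : L.getD nb v0 = L.getD nb 0 := pvGetD_default L nb hc v0 0
      by_cases hlt : L.getD nb v0 < v0
      · obtain ⟨h1, h2, h3⟩ := ih (L.getD nb v0)
        rw [if_pos hlt]
        refine ⟨?_, le_trans h2 (le_of_lt hlt), ?_⟩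
        · rcases h1 with h | ⟨nb', hnb', hcc, he⟩
          · exact Or.inr ⟨nb, List.mem_cons_self .., hc, by rw [h, hd]⟩
          · exact Or.inr ⟨nb', List.mem_cons_of_mem _ hnb', hcc, he⟩
        · intro nb' hnb' hcc
          rcases List.mem_cons.mp hnb' with h | h
          · subst h; rw [← hd]; exact h2
          · exact h3 nb' h hcc
      · obtain ⟨h1, h2, h3⟩ := ih v0
        rw [if_neg hlt]
        refine ⟨h1.imp_right (fun ⟨nb', h', hc', he'⟩ =>
          ⟨nb', List.mem_cons_of_mem _ h', hc', he'⟩), h2, ?_⟩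
        intro nb' hnb' hcc
        rcases List.mem_cons.mp hnb' with h | h
        · subst h; rw [← hd]; omega
        · exact h3 nb' h hcc
    · have hd : L.getD nb v0 = v0 :=
        PySem.Dict.getD_of_not_contains L v0 (by simpa using hc)
      rw [hd, if_neg (lt_irrefl v0)]
      obtain ⟨h1, h2, h3⟩ := ih v0
      refine ⟨h1.imp_right (fun ⟨nb', h', hc', he'⟩ =>
        ⟨nb', List.mem_cons_of_mem _ h', hc', he'⟩), h2, ?_⟩
      intro nb' hnb' hcc
      rcases List.mem_cons.mp hnb' with h | h
      · subst h; exact absurd hcc hc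
      · exact h3 nb' h hcc

-- one relaxation step, case-analysed
lemma pvRelaxCell_cases (L : PySem.Dict (Int × Int) Int) (ch : Bool) (k : Int × Int) :
    (pvRelaxCell (L, ch) k = (L, ch) ∧
      (∀ nb ∈ pvNbs k, L.contains nb = true → L.getD k 0 ≤ L.getD nb 0)) ∨
    (∃ v, v < L.getD k 0 ∧
      (∃ nb ∈ pvNbs k, L.contains nb = true ∧ v = L.getD nb 0) ∧
      pvRelaxCell (L, ch) k = (L.insert k v, true)) := by
  obtain ⟨hor, hle, hall⟩ := pvMinFold L (pvNbs k) (L.getD k 0)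
  have hfun : (fun (v : Int) (nb : Int × Int) => let w := L.getD nb v; if w < v then w else v)
      = (fun (v : Int) (nb : Int × Int) => if L.getD nb v < v then L.getD nb v else v) := rfl
  unfold pvRelaxCell
  simp only [hfun]
  split
  · rename_i hlt
    right
    refine ⟨_, hlt, ?_, rfl⟩
    rcases hor with h | ⟨nb, hnb, hc, he⟩
    · omega
    · exact ⟨nb, hnb, hc, he⟩
  · rename_i hlt
    left
    refine ⟨rfl, ?_⟩
    intro nb hnb hc
    have := hall nb hnb hc
    omega

-- folding one relaxation pass over a key list
lemma pvPassFold (t : List (List Int)) (tgt : Int) (N M : Nat) :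
    ∀ (ks : List (Int × Int)) (L : PySem.Dict (Int × Int) Int) (ch : Bool),
    (∀ k ∈ ks, ∃ c ∈ pvMatch t tgt N M, k = pvKey c) →
    pvVals t tgt N M L →
    ∃ L' ch', ks.foldl pvRelaxCell (L, ch) = (L', ch') ∧
      pvVals t tgt N M L' ∧
      (∀ k, L'.getD k 0 ≤ L.getD k 0) ∧
      (ch = true → ch' = true) ∧
      (ch' = false → L' = L ∧
        ∀ k ∈ ks, ∀ nb ∈ pvNbs k, L.contains nb = true → L.getD k 0 ≤ L.getD nb 0) ∧
      (ch = false → ch' = true →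
        ∃ c ∈ pvMatch t tgt N M, L'.getD (pvKey c) 0 < L.getD (pvKey c) 0) := by
  intro ks
  induction ks with
  | nil =>
    intro L ch _ hv
    exact ⟨L, ch, rfl, hv, fun k => le_refl _, fun h => h,
      fun _ => ⟨rfl, by simp⟩, fun hf ht => absurd (hf ▸ ht) (by simp)⟩
  | cons k ks ih =>
    intro L ch hks hv
    obtain ⟨c0, hc0, hkc0⟩ := hks k (List.mem_cons_self ..)
    subst hkc0
    rcases pvRelaxCell_cases L ch (pvKey c0) with ⟨heq, hfixk⟩ | ⟨v, hvlt, ⟨nb, hnb, hcnb, hveq⟩, heq⟩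
    · obtain ⟨L', ch', hfold, h1, h2, h3, h4, h5⟩ :=
        ih L ch (fun k' hk' => hks k' (List.mem_cons_of_mem _ hk')) hv
      refine ⟨L', ch', by rw [List.foldl_cons, heq, hfold], h1, h2, h3, ?_, h5⟩
      intro hfalse
      obtain ⟨hL, hfix⟩ := h4 hfalse
      refine ⟨hL, ?_⟩
      intro k' hk' nb hnb hcnb
      rcases List.mem_cons.mp hk' with h | h
      · subst h; exact hfixk nb hnb hcnb
      · exact hfix k' h nb hnb hcnb
    · -- the step lowered c0's label to a neighbour's value
      have hok0 : pvOk t tgt N M c0 := pvMem_match.mp hc0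
      have hcont0 : L.contains (pvKey c0) = true := (pvVals_contains hv c0).mpr hok0
      have hnbk : nb ∈ L.keys := (PySem.Dict.contains_iff_mem_keys L nb).mp hcnb
      rw [hv.1] at hnbk
      obtain ⟨d0, hd0, hnbd0⟩ := List.mem_map.mp hnbk
      subst hnbd0
      have hadj : pvAdj c0 d0 := pvNbs_adj hnb
      have hokd : pvOk t tgt N M d0 := pvMem_match.mp hd0
      have hrc0d0 : pvRch t tgt N M c0 d0 :=
        pvRch_step (pvRch_refl hok0) ⟨hok0, hokd, hadj⟩
      have hv1 : pvVals t tgt N M (L.insert (pvKey c0) v) := by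
        refine ⟨by rw [PySem.Dict.keys_insert_of_contains _ _ hcont0]; exact hv.1, ?_, ?_⟩
        · intro c hc
          rw [PySem.Dict.getD_insert]
          split
          · rename_i hck
            obtain rfl : c = c0 := pvKey_inj hck
            obtain ⟨x, hx, hxe⟩ := hv.2.1 d0 hd0
            exact ⟨x, pvRch_trans hrc0d0 hx, by rw [hveq, hxe]⟩
          · exact hv.2.1 c hc
        · intro c hc
          rw [PySem.Dict.getD_insert]
          split
          · rename_i hck
            obtain rfl : c = c0 := pvKey_inj hck
            exact le_of_lt (lt_of_lt_of_le hvlt (hv.2.2 _ hc))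
          · exact hv.2.2 c hc
      obtain ⟨L', ch', hfold, h1, h2, h3, h4, h5⟩ :=
        ih (L.insert (pvKey c0) v) true
          (fun k' hk' => hks k' (List.mem_cons_of_mem _ hk')) hv1
      have hch' : ch' = true := h3 rfl
      have hle1 : ∀ k, (L.insert (pvKey c0) v).getD k 0 ≤ L.getD k 0 := by
        intro k
        rw [PySem.Dict.getD_insert]
        split
        · rename_i hck; subst hck; exact le_of_lt hvlt
        · exact le_refl _
      refine ⟨L', ch', by rw [List.foldl_cons, heq, hfold], h1,
        fun k => le_trans (h2 k) (hle1 k), fun _ => hch', ?_, ?_⟩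
      · intro hfalse; rw [hch'] at hfalse; exact absurd hfalse (by simp)
      · intro _ _
        refine ⟨c0, hc0, ?_⟩
        have := h2 (pvKey c0)
        rw [PySem.Dict.getD_insert, if_pos rfl] at this
        omega

-- the Nat sum of the labels, the termination measure of the while loop
def pvSumL (t : List (List Int)) (tgt : Int) (N M : Nat)
    (L : PySem.Dict (Int × Int) Int) : Nat :=
  ((pvMatch t tgt N M).map (fun c => (L.getD (pvKey c) 0).toNat)).sum

lemma pvSumLe {α : Type} (l : List α) (f g : α → Nat) (hle : ∀ a ∈ l, f a ≤ g a) :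
    (l.map f).sum ≤ (l.map g).sum := by
  induction l with
  | nil => simp
  | cons x l ih =>
    simp only [List.map_cons, List.sum_cons]
    have h1 := hle x (List.mem_cons_self ..)
    have h2 := ih (fun a ha => hle a (List.mem_cons_of_mem _ ha))
    omega

lemma pvSumLt {α : Type} (l : List α) (f g : α → Nat) (hle : ∀ a ∈ l, f a ≤ g a)
    (hlt : ∃ a ∈ l, f a < g a) : (l.map f).sum < (l.map g).sum := by
  induction l with
  | nil => obtain ⟨a, ha, _⟩ := hlt; exact absurd ha (List.not_mem_nil)
  | cons x l ih =>
    obtain ⟨a, ha, hal⟩ := hlt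
    simp only [List.map_cons, List.sum_cons]
    rcases List.mem_cons.mp ha with h | h
    · subst h
      have := pvSumLe l f g (fun a ha => hle a (List.mem_cons_of_mem _ ha))
      omega
    · have h1 := hle x (List.mem_cons_self ..)
      have h2 := ih (fun a ha => hle a (List.mem_cons_of_mem _ ha)) ⟨a, h, hal⟩
      omega

lemma pvSumL_bound (t : List (List Int)) (tgt : Int) (N M : Nat)
    (L : PySem.Dict (Int × Int) Int) (h : pvVals t tgt N M L) :
    pvSumL t tgt N M L ≤ N * M * (N * M) := by
  unfold pvSumL
  have hlen : (pvMatch t tgt N M).length ≤ N * M :=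
    pvNodupGridLen (pvMatch_nodup t tgt N M)
      (fun c hc => ⟨(pvMem_match.mp hc).1, (pvMem_match.mp hc).2.1⟩)
  have hbound : ∀ x ∈ (pvMatch t tgt N M).map (fun c => (L.getD (pvKey c) 0).toNat),
      x ≤ N * M := by
    intro x hx
    obtain ⟨c, hc, rfl⟩ := List.mem_map.mp hx
    have hok := pvMem_match.mp hc
    have h1 : L.getD (pvKey c) 0 ≤ ((c.1 * M + c.2 : Nat) : Int) := by
      have := h.2.2 c hc
      unfold pvIdx at this
      push_cast
      omega
    have h2 : c.1 * M + c.2 < N * M := by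
      have hc2 := hok.2.1
      calc c.1 * M + c.2 < c.1 * M + M := by omega
        _ = (c.1 + 1) * M := by ring
        _ ≤ N * M := Nat.mul_le_mul_right M hok.1
    omega
  calc ((pvMatch t tgt N M).map (fun c => (L.getD (pvKey c) 0).toNat)).sum
      ≤ ((pvMatch t tgt N M).map (fun c => (L.getD (pvKey c) 0).toNat)).length • (N * M) :=
        List.sum_le_card_nsmul _ _ hbound
    _ = (pvMatch t tgt N M).length * (N * M) := by rw [List.length_map]; rfl
    _ ≤ N * M * (N * M) := Nat.mul_le_mul_right _ hlen

-- the while loop reaches a fixpoint within the fuel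
lemma pvRelax_spec (t : List (List Int)) (tgt : Int) (N M : Nat) :
    ∀ (f : Nat) (L : PySem.Dict (Int × Int) Int), pvSumL t tgt N M L < f →
    pvVals t tgt N M L →
    ∃ L', pvRelax f L = L' ∧ pvVals t tgt N M L' ∧
      (∀ c d, c ∈ pvMatch t tgt N M → d ∈ pvMatch t tgt N M → pvAdj c d →
        L'.getD (pvKey c) 0 ≤ L'.getD (pvKey d) 0) := by
  intro f
  induction f with
  | zero => intro L hfuel; omega
  | succ f ih =>
    intro L hfuel hv
    have hks : ∀ k ∈ L.keys, ∃ c ∈ pvMatch t tgt N M, k = pvKey c := by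
      intro k hk
      rw [hv.1] at hk
      obtain ⟨c, hc, he⟩ := List.mem_map.mp hk
      exact ⟨c, hc, he.symm⟩
    obtain ⟨L1, ch, hfold, h1, h2, h3, h4, h5⟩ := pvPassFold t tgt N M L.keys L false hks hv
    have hpass : pvPass L = (L1, ch) := by unfold pvPass; exact hfold
    cases ch with
    | false =>
      obtain ⟨hL1, hfix⟩ := h4 rfl
      refine ⟨L1, ?_, h1, ?_⟩
      · show (let r := pvPass L; if r.2 then pvRelax f r.1 else r.1) = L1
        rw [hpass]
        rfl
      · intro c d hc hd hadj
        rw [hL1]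
        have hkc : pvKey c ∈ L.keys := by
          rw [hv.1]; exact List.mem_map_of_mem hc
        have hcnb : L.contains (pvKey d) = true := (pvVals_contains hv d).mpr (pvMem_match.mp hd)
        exact hfix (pvKey c) hkc (pvKey d) (pvAdj_nbs hadj) hcnb
    | true =>
      have hdec : pvSumL t tgt N M L1 < pvSumL t tgt N M L := by
        obtain ⟨c0, hc0, hlt⟩ := h5 rfl rfl
        apply pvSumLt
        · intro c hc
          have hptle := h2 (pvKey c)
          have hnn : 0 ≤ L1.getD (pvKey c) 0 := by
            obtain ⟨x, _, hxe⟩ := h1.2.1 c hc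
            rw [hxe]
            exact pvIdx_nonneg M x
          omega
        · refine ⟨c0, hc0, ?_⟩
          have hnn : 0 ≤ L1.getD (pvKey c0) 0 := by
            obtain ⟨x, _, hxe⟩ := h1.2.1 c0 hc0
            rw [hxe]
            exact pvIdx_nonneg M x
          omega
      obtain ⟨L', he, hvals, hfix⟩ := ih L1 (by omega) h1
      refine ⟨L', ?_, hvals, hfix⟩
      show (let r := pvPass L; if r.2 then pvRelax f r.1 else r.1) = L'
      rw [hpass]
      exact he

-- at a fixpoint the label is constant oneach component
lemma pvFixEq {t tgt N M} {L : PySem.Dict (Int × Int) Int}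
    (hfix : ∀ c d, c ∈ pvMatch t tgt N M → d ∈ pvMatch t tgt N M → pvAdj c d →
      L.getD (pvKey c) 0 ≤ L.getD (pvKey d) 0) :
    ∀ a b, pvRch t tgt N M a b → L.getD (pvKey a) 0 = L.getD (pvKey b) 0 := by
  intro a b h
  obtain ⟨ha, hr⟩ := h
  induction hr with
  | refl => rfl
  | tail h1 h2 ih =>
    rename_i x y
    have hx : x ∈ pvMatch t tgt N M := pvMem_match.mpr h2.1
    have hy : y ∈ pvMatch t tgt N M := pvMem_match.mpr h2.2.1
    have l1 := hfix x y hx hy h2.2.2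
    have l2 := hfix y x hy hx (pvAdj_symm h2.2.2)
    omega

-- the converged label of c is the row-major index of its component's start
lemma pvLabelFinal {t tgt N M} {L : PySem.Dict (Int × Int) Int}
    (hv : pvVals t tgt N M L)
    (hfix : ∀ c d, c ∈ pvMatch t tgt N M → d ∈ pvMatch t tgt N M → pvAdj c d →
      L.getD (pvKey c) 0 ≤ L.getD (pvKey d) 0) :
    ∀ c s, pvRch t tgt N M s c → pvIsStart t tgt N M s →
      L.getD (pvKey c) 0 = pvIdx M s := by
  intro c s hr hs
  have hcs : L.getD (pvKey c) 0 = L.getD (pvKey s) 0 :=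
    pvFixEq hfix c s (pvRch_symm hr)
  have hsm : s ∈ pvMatch t tgt N M := pvMem_match.mpr hs.1
  have hub : L.getD (pvKey s) 0 ≤ pvIdx M s := hv.2.2 s hsm
  obtain ⟨x, hx, hxe⟩ := hv.2.1 s hsm
  have hxok : pvOk t tgt N M x := pvRch_ok hx
  have hnlt : ¬ pvRmLt x s := hs.2 x hx
  have hlb : pvIdx M s ≤ pvIdx M x := by
    rcases pvRmLt_tri x s with ht | ht | ht
    · exact absurd ht hnlt
    · rw [ht]
    · exact le_of_lt ((pvIdx_lt_iff hs.1.2.1 hxok.2.1).mpr ht)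
  omega

-- ===== Forall₂ helpers =====
lemma pvForall₂_mem_left {α β : Type} {R : α → β → Prop} :
    ∀ {ss : List α} {l : List β}, List.Forall₂ R ss l → ∀ {s}, s ∈ ss →
      ∃ pre x post spre spost, l = pre ++ x :: post ∧ ss = spre ++ s :: spost ∧
        List.Forall₂ R spre pre ∧ List.Forall₂ R spost post ∧ R s x := by
  intro ss l h
  induction h with
  | nil => intro s hs; exact absurd hs (List.not_mem_nil)
  | cons hR hF ih =>
    rename_i a b sss ll
    intro s hs
    rcases List.mem_cons.mp hs with h | h
    · subst h
      exact ⟨[], b, ll, [], sss, rfl, rfl, List.Forall₂.nil, hF, hR⟩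
    · obtain ⟨pre, x, post, spre, spost, he1, he2, hf1, hf2, hx⟩ := ih h
      exact ⟨b :: pre, x, post, a :: spre, spost, by simp [he1], by simp [he2],
        List.Forall₂.cons hR hf1, hf2, hx⟩

lemma pvForall₂_map_eq {α β γ δ : Type} {R1 : α → β → Prop} {R2 : α → γ → Prop}
    (f : β → δ) (h : γ → δ) :
    ∀ {ss : List α} {l1 : List β} {l2 : List γ}, List.Forall₂ R1 ss l1 →
      List.Forall₂ R2 ss l2 →
      (∀ s P g, s ∈ ss → R1 s P → R2 s g → f P = h g) → l1.map f = l2.map h := by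
  intro ss
  induction ss with
  | nil =>
    intro l1 l2 h1 h2 _
    cases h1; cases h2; rfl
  | cons s ss ih =>
    intro l1 l2 h1 h2 hpt
    cases h1 with
    | cons hR1 hF1 =>
      cases h2 with
      | cons hR2 hF2 =>
        rename_i b l1' g l2'
        simp only [List.map_cons]
        rw [hpt s b g (List.mem_cons_self ..) hR1 hR2,
          ih hF1 hF2 (fun s' P G hs hP hG => hpt s' P G (List.mem_cons_of_mem _ hs) hP hG)]

-- the group dict's key list, read off the Forall₂ invariant
lemma pvForall₂_keys {t tgt N M : _} {pr : List (Nat × Nat)} :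
    ∀ {ss : List (Nat × Nat)} {items : List (Int × List (Nat × Nat))},
    List.Forall₂ (fun (s : Nat × Nat) (g : Int × List (Nat × Nat)) =>
      g.1 = pvIdx M s ∧ g.2.Nodup ∧
      (∀ c, c ∈ g.2 ↔ (pvRch t tgt N M s c ∧ c ∈ pr))) ss items →
    items.map Prod.fst = ss.map (pvIdx M) := by
  intro ss items h
  induction h with
  | nil => rfl
  | cons hR hF ih => simp only [List.map_cons, hR.1, ih]

lemma pvForall₂_mem_right {α β : Type} {R : α → β → Prop} :
    ∀ {ss : List α} {l : List β}, List.Forall₂ R ss l → ∀ {b}, b ∈ l → ∃ a ∈ ss, R a b := by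
  intro ss l h
  induction h with
  | nil => intro b hb; exact absurd hb (List.not_mem_nil)
  | cons hR hF ih =>
    intro b hb
    rcases List.mem_cons.mp hb with h | h
    · subst h; exact ⟨_, List.mem_cons_self .., hR⟩
    · obtain ⟨a, ha, hab⟩ := ih h
      exact ⟨a, List.mem_cons_of_mem _ ha, hab⟩

lemma pvForall₂_imp_mem {α β : Type} {R R' : α → β → Prop} :
    ∀ {ss : List α} {l : List β}, List.Forall₂ R ss l →
      (∀ a b, a ∈ ss → R a b → R' a b) → List.Forall₂ R' ss l := by
  intro ss l h
  induction h with
  | nil => intro _; exact List.Forall₂.nil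
  | cons hR hF ih =>
    intro himp
    exact List.Forall₂.cons (himp _ _ (List.mem_cons_self ..) hR)
      (ih (fun a b ha hR => himp a b (List.mem_cons_of_mem _ ha) hR))

-- ===== the coupled row-major scan: A's DFS scan vs B's grouping pass =====
lemma pvScan2 (t : List (List Int)) (cf : Bool) (N M : Nat)
    (Lf : PySem.Dict (Int × Int) Int)
    (hcont : ∀ c : Nat × Nat, Lf.contains (pvKey c) = true ↔ pvOk t (pvTarget cf) N M c)
    (hlab : ∀ c s : Nat × Nat, pvRch t (pvTarget cf) N M s c →
      pvIsStart t (pvTarget cf) N M s → Lf.getD (pvKey c) 0 = pvIdx M s) :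
    ∀ (rem pr : List (Nat × Nat)), pvCells N M = pr ++ rem →
    ∀ (V : List (Nat × Nat)) (pA : List (List (Int × Int)))
      (G : PySem.Dict Int (List (Nat × Nat))) (ss : List (Nat × Nat)),
    V.Nodup → (∀ c ∈ V, pvGrid N M c) →
    (∀ c, pvOk t (pvTarget cf) N M c → (c ∈ V ↔ ∃ d ∈ pr, pvRch t (pvTarget cf) N M d c)) →
    ss.Pairwise pvRmLt →
    (∀ s ∈ ss, pvIsStart t (pvTarget cf) N M s ∧ s ∈ pr) →
    (∀ c, pvOk t (pvTarget cf) N M c →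
      ((∃ d ∈ pr, pvRch t (pvTarget cf) N M d c) ↔ ∃ s ∈ ss, pvRch t (pvTarget cf) N M s c)) →
    List.Forall₂ (fun (s : Nat × Nat) (P : List (Int × Int)) => ∃ P' : List (Nat × Nat),
      P = P'.map (fun c => ((c.1 : Int) - s.1, (c.2 : Int) - s.2)) ∧ P'.Nodup ∧
      (∀ c, c ∈ P' ↔ pvRch t (pvTarget cf) N M s c)) ss pA →
    List.Forall₂ (fun (s : Nat × Nat) (g : Int × List (Nat × Nat)) =>
      g.1 = pvIdx M s ∧ g.2.Nodup ∧
      (∀ c, c ∈ g.2 ↔ (pvRch t (pvTarget cf) N M s c ∧ c ∈ pr))) ss G.items →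
    ∃ (V' : List (Nat × Nat)) (pA' : List (List (Int × Int))) (ss' : List (Nat × Nat)),
      rem.foldl (fun st c => pvScanStepA t cf N M st c.1 c.2) (V, pA) = (V', pA') ∧
      ss'.Pairwise pvRmLt ∧
      (∀ s ∈ ss', pvIsStart t (pvTarget cf) N M s ∧ s ∈ pr ++ rem) ∧
      List.Forall₂ (fun (s : Nat × Nat) (P : List (Int × Int)) => ∃ P' : List (Nat × Nat),
        P = P'.map (fun c => ((c.1 : Int) - s.1, (c.2 : Int) - s.2)) ∧ P'.Nodup ∧
        (∀ c, c ∈ P' ↔ pvRch t (pvTarget cf) N M s c)) ss' pA' ∧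
      List.Forall₂ (fun (s : Nat × Nat) (g : Int × List (Nat × Nat)) =>
        g.1 = pvIdx M s ∧ g.2.Nodup ∧
        (∀ c, c ∈ g.2 ↔ (pvRch t (pvTarget cf) N M s c ∧ c ∈ pr ++ rem)))
        ss' (rem.foldl (fun G c => pvGroupCell Lf G c.1 c.2) G).items := by
  intro rem
  induction rem with
  | nil =>
    intro pr hsplit V pA G ss hVnd hVg hV hsspw hssf hcov hFa hFg
    refine ⟨V, pA, ss, rfl, hsspw, ?_, hFa, ?_⟩
    · intro s hs; simpa using hssf s hs
    · simpa using hFg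
  | cons c rem' ih =>
    intro pr hsplit V pA G ss hVnd hVg hV hsspw hssf hcov hFa hFg
    obtain ⟨i, j⟩ := c
    have hgridc : pvGrid N M (i, j) := pvMem_cells.mp (by rw [hsplit]; simp)
    have hsplit' : pvCells N M = (pr ++ [(i, j)]) ++ rem' := by
      rw [hsplit, List.append_assoc, List.singleton_append]
    have hlist : pr ++ (i, j) :: rem' = (pr ++ [(i, j)]) ++ rem' := by simp
    have hpw := pvCells_pairwise N M
    rw [hsplit] at hpw
    have hpr_lt : ∀ x ∈ pr, pvRmLt x (i, j) :=
      fun x hx => (List.pairwise_append.mp hpw).2.2 x hx (i, j) (List.mem_cons_self ..)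
    have hpw2 := (List.pairwise_append.mp hpw).2.1
    have hfw : ∀ x ∈ rem', pvRmLt (i, j) x := (List.pairwise_cons.mp hpw2).1
    have hnotpr : (i, j) ∉ pr := fun hx => pvRmLt_ne (hpr_lt _ hx) rfl
    have hGkeys := pvForall₂_keys hFg
    have hssM : ∀ s ∈ ss, s.2 < M := fun s hs => (hssf s hs).1.1.2.1
    have hkeys_pw : (ss.map (pvIdx M)).Pairwise (· < ·) := by
      rw [List.pairwise_map]
      exact List.Pairwise.imp_of_mem
        (fun {a b} ha hb hr => (pvIdx_lt_iff (hssM a ha) (hssM b hb)).mpr hr) hsspw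
    have hGnd : G.keys.Nodup := by
      show (G.items.map Prod.fst).Nodup
      rw [hGkeys]
      exact hkeys_pw.imp (fun h => ne_of_lt h)
    have hssnd : ss.Nodup := hsspw.imp (fun h => pvRmLt_ne h)
    simp only [List.foldl_cons]
    rw [hlist] at *
    by_cases hok : pvOk t (pvTarget cf) N M (i, j)
    · have hconti : Lf.contains ((i : Int), (j : Int)) = true := (hcont (i, j)).mpr hok
      by_cases hcV : (i, j) ∈ V
      · -- in an earlier component: A skips, B appends (i, j) to its start's group
        obtain ⟨s0, hs0, hrs0⟩ := (hcov _ hok).mp ((hV _ hok).mp hcV)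
        have hlab0 : Lf.getD ((i : Int), (j : Int)) 0 = pvIdx M s0 :=
          hlab _ s0 hrs0 (hssf s0 hs0).1
        have hA : pvScanStepA t cf N M (V, pA) i j = (V, pA) := by
          simp only [pvScanStepA]
          rw [if_pos hcV]
        obtain ⟨pre, g0, post, spre, spost, hitems, hsse, hf1, hf2, hg0⟩ :=
          pvForall₂_mem_left hFg hs0
        have hg0pair : g0 = (pvIdx M s0, g0.2) := by rw [← hg0.1]
        have hg0mem : (pvIdx M s0, g0.2) ∈ G.items := by
          rw [hitems, ← hg0pair]
          exact List.mem_append_right _ (List.mem_cons_self ..)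
        have hgetG : G.getD (pvIdx M s0) [] = g0.2 :=
          PySem.Dict.getD_of_mem_items G hg0mem hGnd []
        have hcontG : G.contains (pvIdx M s0) = true :=
          (PySem.Dict.contains_iff_mem_keys G _).mpr
            (by show _ ∈ G.items.map Prod.fst
                exact List.mem_map.mpr ⟨_, hg0mem, rfl⟩)
        have hmem_of : ∀ s, s ∈ spre ∨ s ∈ spost → s ∈ ss := by
          intro s hs
          rw [hsse]
          rcases hs with h | h
          · exact List.mem_append_left _ h
          · exact List.mem_append_right _ (List.mem_cons_of_mem _ h)
        have hne0 : ∀ s, s ∈ spre ∨ s ∈ spost → s ≠ s0 := by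
          intro s hs he
          subst he
          rw [hsse] at hssnd
          rcases hs with h | h
          · exact (List.disjoint_of_nodup_append hssnd) h (List.mem_cons_self ..)
          · exact (List.nodup_cons.mp (List.nodup_append.mp hssnd).2.1).1 h
        have hs_only : ∀ s ∈ ss, pvRch t (pvTarget cf) N M s (i, j) → s = s0 :=
          fun s hs hr => pvStartUnique (hssf s hs).1 (hssf s0 hs0).1
            (pvRch_trans hr (pvRch_symm hrs0))
        have hB : pvGroupCell Lf G i j =
            PySem.Dict.mk (pre ++ (pvIdx M s0, g0.2 ++ [(i, j)]) :: post) := by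
          unfold pvGroupCell
          rw [if_pos hconti]
          show G.insert (Lf.getD ((i : Int), (j : Int)) 0)
            ((G.getD (Lf.getD ((i : Int), (j : Int)) 0) []) ++ [(i, j)]) = _
          rw [hlab0, hgetG]
          apply PySem.Dict.ext
          rw [PySem.Dict.items_insert_of_contains G _ hcontG, hitems]
          rw [List.map_append, List.map_cons]
          have hpre : pre.map (fun p => if (p.1 == pvIdx M s0) = true
              then (pvIdx M s0, g0.2 ++ [(i, j)]) else p) = pre := by
            rw [List.map_congr_left (g := fun p => p) ?_, List.map_id']
            intro p hp
            obtain ⟨s, hs, hR⟩ := pvForall₂_mem_right hf1 hp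
            rw [if_neg]
            simp only [beq_iff_eq, hR.1]
            intro he
            exact hne0 s (Or.inl hs) (pvIdx_inj (hssM s (hmem_of s (Or.inl hs))) (hssM s0 hs0) he)
          have hpost : post.map (fun p => if (p.1 == pvIdx M s0) = true
              then (pvIdx M s0, g0.2 ++ [(i, j)]) else p) = post := by
            rw [List.map_congr_left (g := fun p => p) ?_, List.map_id']
            intro p hp
            obtain ⟨s, hs, hR⟩ := pvForall₂_mem_right hf2 hp
            rw [if_neg]
            simp only [beq_iff_eq, hR.1]
            intro he
            exact hne0 s (Or.inr hs) (pvIdx_inj (hssM s (hmem_of s (Or.inr hs))) (hssM s0 hs0) he)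
          rw [hpre, hpost, if_pos (by simp [hg0.1])]
        rw [hA, hB]
        have habs : pvOk t (pvTarget cf) N M (i, j) →
            ∃ d ∈ pr, pvRch t (pvTarget cf) N M d (i, j) :=
          fun _ => (hV _ hok).mp hcV
        refine ih (pr ++ [(i, j)]) hsplit' V pA _ ss hVnd hVg ?_ hsspw ?_ ?_ hFa ?_
        · intro x hxok
          rw [hV x hxok]
          exact (pvAbsorb habs x).symm
        · exact fun s hs => ⟨(hssf s hs).1, List.mem_append_left _ (hssf s hs).2⟩
        · intro x hxok
          rw [pvAbsorb habs x]
          exact hcov x hxok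
        · show List.Forall₂ _ ss (pre ++ (pvIdx M s0, g0.2 ++ [(i, j)]) :: post)
          rw [hsse]
          refine List.rel_append (pvForall₂_imp_mem hf1 ?_)
            (List.Forall₂.cons ?_ (pvForall₂_imp_mem hf2 ?_))
          · intro s g hs hR
            refine ⟨hR.1, hR.2.1, ?_⟩
            intro x
            rw [hR.2.2 x]
            constructor
            · rintro ⟨h1, h2⟩; exact ⟨h1, List.mem_append_left _ h2⟩
            · rintro ⟨h1, h2⟩
              rcases List.mem_append.mp h2 with h | h
              · exact ⟨h1, h⟩
              · rw [List.mem_singleton] at h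
                subst h
                exact absurd (hs_only s (hmem_of s (Or.inl hs)) h1)
                  (hne0 s (Or.inl hs))
          · refine ⟨rfl, ?_, ?_⟩
            · rw [List.nodup_append]
              refine ⟨hg0.2.1, List.nodup_singleton _, ?_⟩
              intro a ha b hb
              rw [List.mem_singleton] at hb
              subst hb
              intro he
              exact hnotpr (he ▸ ((hg0.2.2 a).mp ha).2)
            · intro x
              constructor
              · intro hx
                rcases List.mem_append.mp hx with h | h
                · obtain ⟨h1, h2⟩ := (hg0.2.2 x).mp h
                  exact ⟨h1, List.mem_append_left _ h2⟩
                · rw [List.mem_singleton] at h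
                  subst h
                  exact ⟨hrs0, List.mem_append_right _ (List.mem_singleton.mpr rfl)⟩
              · rintro ⟨h1, h2⟩
                rcases List.mem_append.mp h2 with h | h
                · exact List.mem_append_left _ ((hg0.2.2 x).mpr ⟨h1, h⟩)
                · exact List.mem_append_right _ h
          · intro s g hs hR
            refine ⟨hR.1, hR.2.1, ?_⟩
            intro x
            rw [hR.2.2 x]
            constructor
            · rintro ⟨h1, h2⟩; exact ⟨h1, List.mem_append_left _ h2⟩
            · rintro ⟨h1, h2⟩
              rcases List.mem_append.mp h2 with h | h
              · exact ⟨h1, h⟩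
              · rw [List.mem_singleton] at h
                subst h
                exact absurd (hs_only s (hmem_of s (Or.inr hs)) h1)
                  (hne0 s (Or.inr hs))
      · -- a fresh component: A runs its DFS, B opens a new group keyed pvIdx M (i, j)
        have hcell : pvCell t i j = pvTarget cf := hok.2.2
        obtain ⟨V', P', heqA, d1, d2, d3, d4, d5, d6, d7⟩ :=
          pvDfs_spec t cf N M i j (N * M + 1) ((i, j) :: V) [(i, j)] []
            (by
              have : V.length + 1 ≤ N * M := pvNodupGridLen (List.nodup_cons.mpr ⟨hcV, hVnd⟩)
                (by intro x hx; rcases List.mem_cons.mp hx with h | h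
                    · subst h; exact hgridc
                    · exact hVg x h)
              simp only [List.length_cons, List.length_nil]
              omega)
            (List.nodup_cons.mpr ⟨hcV, hVnd⟩)
            (by intro x hx; rcases List.mem_cons.mp hx with h | h
                · subst h; exact hgridc
                · exact hVg x h)
            (List.nodup_singleton _) List.nodup_nil (by simp)
            (by simp) (by simp)
            (by intro x hx; rw [List.mem_singleton] at hx; subst hx; exact pvRch_refl hok)
            (by simp) (by simp)
            (by
              intro x hx hxok hxr
              rcases List.mem_cons.mp hx with h | h
              · subst h; simp
              · exfalso
                obtain ⟨d, hd, hdr⟩ := (hV x hxok).mp h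
                exact hcV ((hV _ hok).mpr ⟨d, hd, pvRch_trans hdr (pvRch_symm hxr)⟩))
            (by simp)
        simp only [List.map_nil] at heqA
        have hstart : pvIsStart t (pvTarget cf) N M (i, j) := by
          refine ⟨hok, ?_⟩
          intro x hrx hlt
          have hxok := pvRch_ok hrx
          have hxc : x ∈ (pr ++ [(i, j)]) ++ rem' := by
            rw [← hsplit']
            exact pvMem_cells.mpr ⟨hxok.1, hxok.2.1⟩
          rcases List.mem_append.mp hxc with h | h
          · rcases List.mem_append.mp h with h | h
            · exact hcV ((hV _ hok).mpr ⟨x, h, pvRch_symm hrx⟩)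
            · rw [List.mem_singleton] at h
              subst h
              exact pvRmLt_ne hlt rfl
          · have := hfw x h
            unfold pvRmLt at this hlt
            omega
        have hlabi : Lf.getD ((i : Int), (j : Int)) 0 = pvIdx M (i, j) :=
          hlab _ _ (pvRch_refl hok) hstart
        have hcontG : G.contains (pvIdx M (i, j)) = false := by
          cases hcg : G.contains (pvIdx M (i, j)) with
          | false => rfl
          | true =>
            exfalso
            have := (PySem.Dict.contains_iff_mem_keys G _).mp hcg
            have hmk : pvIdx M (i, j) ∈ G.items.map Prod.fst := this
            rw [hGkeys] at hmk
            obtain ⟨s, hs, he⟩ := List.mem_map.mp hmk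
            have : s = (i, j) := pvIdx_inj (hssM s hs) hgridc.2 he
            subst this
            exact hnotpr (hssf _ hs).2
        have hA : pvScanStepA t cf N M (V, pA) i j =
            (V', pA ++ [P'.map (fun c => ((c.1 : Int) - i, (c.2 : Int) - j))]) := by
          simp only [pvScanStepA]
          rw [if_neg hcV, if_neg (fun h => h hcell), heqA]
        have hB : pvGroupCell Lf G i j =
            PySem.Dict.mk (G.items ++ [(pvIdx M (i, j), [(i, j)])]) := by
          unfold pvGroupCell
          rw [if_pos hconti]
          show G.insert (Lf.getD ((i : Int), (j : Int)) 0)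
            ((G.getD (Lf.getD ((i : Int), (j : Int)) 0) []) ++ [(i, j)]) = _
          rw [hlabi, PySem.Dict.getD_of_not_contains G [] hcontG]
          apply PySem.Dict.ext
          rw [PySem.Dict.items_insert_of_not_contains G _ hcontG]
          rfl
        rw [hA, hB]
        have hnocov : ∀ s ∈ ss, ¬ pvRch t (pvTarget cf) N M s (i, j) := by
          intro s hs hr
          exact hcV ((hV _ hok).mpr ((hcov _ hok).mpr ⟨s, hs, hr⟩))
        refine ih (pr ++ [(i, j)]) hsplit' V'
          (pA ++ [P'.map (fun c => ((c.1 : Int) - i, (c.2 : Int) - j))]) _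
          (ss ++ [(i, j)]) d4 d5 ?_ ?_ ?_ ?_ ?_ ?_
        · intro x hxok
          constructor
          · intro hxV'
            rcases d6 x hxV' hxok with h | h
            · rcases List.mem_cons.mp h with h | h
              · subst h
                exact ⟨(i, j), List.mem_append_right _ (List.mem_singleton.mpr rfl),
                  pvRch_refl hok⟩
              · obtain ⟨d, hd, hdr⟩ := (hV x hxok).mp h
                exact ⟨d, List.mem_append_left _ hd, hdr⟩
            · exact ⟨(i, j), List.mem_append_right _ (List.mem_singleton.mpr rfl), h⟩
          · rintro ⟨d, hd, hdr⟩
            rcases List.mem_append.mp hd with h | h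
            · exact d3 x (List.mem_cons_of_mem _ ((hV x hxok).mpr ⟨d, h, hdr⟩))
            · rw [List.mem_singleton] at h
              subst h
              exact d7 x ((d2 x).mpr hdr)
        · rw [List.pairwise_append]
          exact ⟨hsspw, List.pairwise_singleton _ _, by
            intro s hs b hb
            rw [List.mem_singleton] at hb
            subst hb
            exact hpr_lt s (hssf s hs).2⟩
        · intro s hs
          rcases List.mem_append.mp hs with h | h
          · exact ⟨(hssf s h).1, List.mem_append_left _ (hssf s h).2⟩
          · rw [List.mem_singleton] at h
            subst h
            exact ⟨hstart, List.mem_append_right _ (List.mem_singleton.mpr rfl)⟩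
        · intro x hxok
          constructor
          · rintro ⟨d, hd, hdr⟩
            rcases List.mem_append.mp hd with h | h
            · obtain ⟨s, hs, hsr⟩ := (hcov x hxok).mp ⟨d, h, hdr⟩
              exact ⟨s, List.mem_append_left _ hs, hsr⟩
            · rw [List.mem_singleton] at h
              subst h
              exact ⟨(i, j), List.mem_append_right _ (List.mem_singleton.mpr rfl), hdr⟩
          · rintro ⟨s, hs, hsr⟩
            rcases List.mem_append.mp hs with h | h
            · obtain ⟨d, hd, hdr⟩ := (hcov x hxok).mpr ⟨s, h, hsr⟩
              exact ⟨d, List.mem_append_left _ hd, hdr⟩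
            · rw [List.mem_singleton] at h
              subst h
              exact ⟨(i, j), List.mem_append_right _ (List.mem_singleton.mpr rfl), hsr⟩
        · exact List.rel_append hFa
            (List.Forall₂.cons ⟨P', rfl, d1, d2⟩ List.Forall₂.nil)
        · show List.Forall₂ _ (ss ++ [(i, j)]) (G.items ++ [(pvIdx M (i, j), [(i, j)])])
          refine List.rel_append (pvForall₂_imp_mem hFg ?_)
            (List.Forall₂.cons ?_ List.Forall₂.nil)
          · intro s g hs hR
            refine ⟨hR.1, hR.2.1, ?_⟩
            intro x
            rw [hR.2.2 x]
            constructor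
            · rintro ⟨h1, h2⟩; exact ⟨h1, List.mem_append_left _ h2⟩
            · rintro ⟨h1, h2⟩
              rcases List.mem_append.mp h2 with h | h
              · exact ⟨h1, h⟩
              · rw [List.mem_singleton] at h
                subst h
                exact absurd h1 (hnocov s hs)
          · refine ⟨rfl, List.nodup_singleton _, ?_⟩
            intro x
            rw [List.mem_singleton]
            constructor
            · rintro rfl
              exact ⟨pvRch_refl hok, List.mem_append_right _ (List.mem_singleton.mpr rfl)⟩
            · rintro ⟨h1, h2⟩
              rcases List.mem_append.mp h2 with h | h
              · exfalso
                obtain ⟨s, hs, hsr⟩ := (hcov x (pvRch_ok h1)).mp ⟨x, h, pvRch_refl (pvRch_ok h1)⟩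
                exact hnocov s hs (pvRch_trans hsr (pvRch_symm h1))
              · rwa [List.mem_singleton] at h
    · -- the cell does not match: B skips; A marks it visited if new
      have hcontf : Lf.contains ((i : Int), (j : Int)) = false := by
        cases hcg : Lf.contains ((i : Int), (j : Int)) with
        | false => rfl
        | true => exact absurd ((hcont (i, j)).mp hcg) hok
      have hB : pvGroupCell Lf G i j = G := by
        unfold pvGroupCell
        rw [hcontf]
        simp
      rw [hB]
      have habs : pvOk t (pvTarget cf) N M (i, j) →
          ∃ d ∈ pr, pvRch t (pvTarget cf) N M d (i, j) :=
        fun hc => absurd hc hok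
      have hFg' : List.Forall₂ (fun (s : Nat × Nat) (g : Int × List (Nat × Nat)) =>
          g.1 = pvIdx M s ∧ g.2.Nodup ∧
          (∀ c, c ∈ g.2 ↔ (pvRch t (pvTarget cf) N M s c ∧ c ∈ pr ++ [(i, j)])))
          ss G.items := by
        refine pvForall₂_imp_mem hFg ?_
        intro s g hs hR
        refine ⟨hR.1, hR.2.1, ?_⟩
        intro x
        rw [hR.2.2 x]
        constructor
        · rintro ⟨h1, h2⟩; exact ⟨h1, List.mem_append_left _ h2⟩
        · rintro ⟨h1, h2⟩
          rcases List.mem_append.mp h2 with h | h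
          · exact ⟨h1, h⟩
          · rw [List.mem_singleton] at h
            subst h
            exact absurd (pvRch_ok h1) hok
      by_cases hcV : (i, j) ∈ V
      · have hA : pvScanStepA t cf N M (V, pA) i j = (V, pA) := by
          simp only [pvScanStepA]
          rw [if_pos hcV]
        rw [hA]
        refine ih (pr ++ [(i, j)]) hsplit' V pA G ss hVnd hVg ?_ hsspw ?_ ?_ hFa hFg'
        · intro x hxok
          rw [hV x hxok]
          exact (pvAbsorb habs x).symm
        · exact fun s hs => ⟨(hssf s hs).1, List.mem_append_left _ (hssf s hs).2⟩
        · intro x hxok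
          rw [pvAbsorb habs x]
          exact hcov x hxok
      · have hcellne : pvCell t i j ≠ pvTarget cf := by
          intro hc
          exact hok ⟨hgridc.1, hgridc.2, hc⟩
        have hA : pvScanStepA t cf N M (V, pA) i j = ((i, j) :: V, pA) := by
          simp only [pvScanStepA]
          rw [if_neg hcV, if_pos hcellne]
        rw [hA]
        refine ih (pr ++ [(i, j)]) hsplit' ((i, j) :: V) pA G ss
          (List.nodup_cons.mpr ⟨hcV, hVnd⟩)
          (by intro x hx; rcases List.mem_cons.mp hx with h | h
              · subst h; exact hgridc
              · exact hVg x h) ?_ hsspw ?_ ?_ hFa hFg'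
        · intro x hxok
          rw [pvAbsorb habs x, ← hV x hxok]
          constructor
          · intro hx
            rcases List.mem_cons.mp hx with h | h
            · exact absurd (h ▸ hxok) hok
            · exact h
          · exact List.mem_cons_of_mem _
        · exact fun s hs => ⟨(hssf s hs).1, List.mem_append_left _ (hssf s hs).2⟩
        · intro x hxok
          rw [pvAbsorb habs x]
          exact hcov x hxok

-- one final piece: A's (len, to_squares offsets) equals B's pvPiece of the cell list
lemma pvFinalPiece (t : List (List Int)) (cf : Bool) (N M : Nat)
    (s : Nat × Nat) (P : List (Int × Int)) (cells : List (Nat × Nat))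
    (hstart : pvIsStart t (pvTarget cf) N M s)
    (hP : ∃ P' : List (Nat × Nat),
      P = P'.map (fun c => ((c.1 : Int) - s.1, (c.2 : Int) - s.2)) ∧ P'.Nodup ∧
      (∀ c, c ∈ P' ↔ pvRch t (pvTarget cf) N M s c))
    (hcnd : cells.Nodup)
    (hcm : ∀ c, c ∈ cells ↔ (pvRch t (pvTarget cf) N M s c ∧ c ∈ pvCells N M)) :
    ((P.length : Int), to_squares P) = pvPiece cells := by
  obtain ⟨P', hPe, hPnd, hPm⟩ := hP
  have hcm' : ∀ c, c ∈ cells ↔ pvRch t (pvTarget cf) N M s c := by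
    intro c
    rw [hcm c]
    exact and_iff_left_of_imp (fun hr => pvMem_cells.mpr ⟨(pvRch_ok hr).1, (pvRch_ok hr).2.1⟩)
  have hmemPC : ∀ c, c ∈ P' ↔ c ∈ cells := fun c => (hPm c).trans (hcm' c).symm
  have hscell : s ∈ cells := (hcm' s).mpr (pvRch_refl hstart.1)
  have hge : ∀ c ∈ cells, s.1 ≤ c.1 ∧ (c.1 = s.1 → s.2 ≤ c.2) := by
    intro c hc
    have := hstart.2 c ((hcm' c).mp hc)
    unfold pvRmLt at this
    constructor
    · omega
    · intro h; omega
  have hne : cells ≠ [] := fun he => by rw [he] at hscell; exact absurd hscell (List.not_mem_nil)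
  have hnem : cells.map Prod.fst ≠ [] := fun he => hne (List.map_eq_nil_iff.mp he)
  have hnem2 : cells.map Prod.snd ≠ [] := fun he => hne (List.map_eq_nil_iff.mp he)
  obtain ⟨my, hmy⟩ := pvMin?_some _ hnem
  obtain ⟨My, hMy⟩ := pvMax?_some _ hnem
  obtain ⟨mx, hmx⟩ := pvMin?_some _ hnem2
  obtain ⟨Mx, hMx⟩ := pvMax?_some _ hnem2
  have hmys : my = s.1 := by
    have h1 := PySem.List.min?_isMin hmy s.1 (List.mem_map_of_mem hscell)
    obtain ⟨cm, hcmm, hcme⟩ := List.mem_map.mp (PySem.List.min?_mem hmy)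
    have h2 := (hge cm hcmm).1
    omega
  subst hmys
  have hlen : P'.length = cells.length :=
    ((List.perm_ext_iff_of_nodup hPnd hcnd).mpr hmemPC).length_eq
  have hsq := pvPieceEq P' cells s.1 s.2 hmemPC (by rwa [Prod.mk.eta]) hge My mx Mx hMy hmx hMx
  unfold pvPiece
  rw [hmy, hMy, hmx, hMx, PySem.Set.ofList_eq_self_of_nodup cells hcnd]
  simp only [Option.getD_some]
  refine Prod.ext ?_ ?_
  · show (P.length : Int) = (cells.length : Int)
    rw [hPe, List.length_map, hlen]
  · show to_squares P = _
    rw [hPe, hsq]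
    rfl

-- ===== the main equivalence =====
theorem pv_main (t : List (List Int)) (cf : Bool) :
    create_squares t cf = create_squares_alt t cf := by
  simp only [create_squares, create_squares_alt]
  rw [pvNestedFold (pvScanStepA t cf t.length (t.headD []).length)]
  rw [show (if cf then (1 : Int) else 0) = pvTarget cf from rfl]
  obtain ⟨Lf, hLe, hLv, hLfix⟩ :=
    pvRelax_spec t (pvTarget cf) t.length (t.headD []).length
      (t.length * (t.headD []).length * (t.length * (t.headD []).length) + 1)
      (pvInit t (pvTarget cf) t.length (t.headD []).length)
      (Nat.lt_succ_of_le (pvSumL_bound _ _ _ _ _ (pvVals_init _ _ _ _)))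
      (pvVals_init _ _ _ _)
  rw [hLe]
  rw [pvNestedFold (pvGroupCell Lf)]
  obtain ⟨V', pA', ss', hfoldA, hsspw', hssf', hFa', hFg'⟩ :=
    pvScan2 t cf t.length (t.headD []).length Lf
      (pvVals_contains hLv) (pvLabelFinal hLv hLfix)
      (pvCells t.length (t.headD []).length) [] (by simp)
      [] [] PySem.Dict.empty []
      List.nodup_nil (by simp)
      (by intro c hc; simp)
      List.Pairwise.nil (by simp)
      (by intro c hc; simp)
      List.Forall₂.nil
      (by show List.Forall₂ _ ([] : List (Nat × Nat)) ([] : List (Int × List (Nat × Nat)))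
          exact List.Forall₂.nil)
  rw [hfoldA]
  simp only [List.nil_append] at hssf' hFg'
  set G' := (pvCells t.length (t.headD []).length).foldl
    (fun G c => pvGroupCell Lf G c.1 c.2) PySem.Dict.empty with hG'
  have hssM' : ∀ s ∈ ss', s.2 < (t.headD []).length := fun s hs => (hssf' s hs).1.1.2.1
  have hGkeys' := pvForall₂_keys hFg'
  have hkpw : G'.keys.Pairwise (· < ·) := by
    show (G'.items.map Prod.fst).Pairwise _
    rw [hGkeys', List.pairwise_map]
    exact List.Pairwise.imp_of_mem
      (fun {a b} ha hb hr =>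
        (pvIdx_lt_iff (hssM' a ha) (hssM' b hb)).mpr hr) hsspw'
  have hknd : G'.keys.Nodup := hkpw.imp (fun h => ne_of_lt h)
  rw [PySem.List.sorted_eq_of_perm_of_pairwise_lt G'.keys G'.keys (fun x => x)
    (List.Perm.refl _) hkpw]
  have hmapkeys : G'.keys.map (fun lab => pvPiece (G'.getD lab []))
      = G'.items.map (fun g => pvPiece g.2) := by
    show (G'.items.map Prod.fst).map _ = _
    rw [List.map_map]
    apply List.map_congr_left
    intro g hg
    show pvPiece (G'.getD g.1 []) = pvPiece g.2
    rw [PySem.Dict.getD_of_mem_items G' (show (g.1, g.2) ∈ G'.items from hg) hknd]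
  rw [hmapkeys]
  exact pvForall₂_map_eq _ _ hFa' hFg'
    (fun s P g hs hP hg =>
      pvFinalPiece t cf _ _ s P g.2 (hssf' s hs).1 hP hg.2.1 hg.2.2)

-- ===== VERDICT (by name: the statement is the Claim_ definition above) =====
theorem create_squares_spec : Claim_equal_create_squares := by
  intro table check_filled _ _
  unfold Spec_create_squares
  exact pv_main table check_filled
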